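-- pv_equiv track=rewrite | github.com/arayabrain/space-engineers-ai-spaceship-generator | pcgsepy/lsystem/parser.py | _add_intersections
-- ===== SOURCE A (Python) =====
-- def _add_intersections(
--                        string: str) -> str:
--     brackets = []
--     for i, c in enumerate(string):
--         if c == '[':
--             # find first closing bracket
--             idx_c = string.index(']', i)
--             # update closing bracket position in case of nested brackets
--             ni_o = string.find('[', i + 1)
--             while ni_o != -1 and string.find('[', ni_o) < idx_c:
--                 idx_c = string.index(']', idx_c + 1)
--                 ni_o = string.find('[', ni_o + 1)
--             # add to list of brackets
--             brackets.append((i, idx_c))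
--     to_add = {}
--     # add intersection types
--     for i, b in enumerate(brackets):
--         # get rotation
--         rot = string[string.find('Rot', b[0], b[1]) + 3:
--                      string.find('corridor', b[0], b[1])]
--         # check for neighboring rotations
--         has_neighbours = False
--         for t0, t1 in brackets[i:]:
--             if b[1] == t0 - 1:
--                 has_neighbours = True
--                 if b[1] not in to_add.keys():
--                     to_add[t1] = [rot]
--                 else:
--                     to_add[t1] = [*to_add[b[1]], rot]
--                     to_add.pop(b[1])
--                 break
--         if not has_neighbours:
--             if b[1] not in to_add:
--                 to_add[b[1]] = [rot]
--             else:
--                 to_add[b[1]].append(rot)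
--     # add to the string
--     offset = 0
--     for i in sorted(list(to_add.keys())):
--         rot = ''.join(sorted(list(set(to_add[i]))))
--         s = f'{rot}intersection!(25)'
--         string = string[:i + 1 + offset] + s + string[i + 1 + offset:]
--         offset += len(s)
--     return string
-- ===== SOURCE B (Python) =====
-- def _add_intersections(string: str) -> str:
--     # one pass: a stack matches brackets; each closed group extends the chain
--     # ending just before its open, keyed by its own close position
--     stack = []
--     chains = {}
--     for i, ch in enumerate(string):
--         if ch == '[':
--             stack.append(i)
--         elif ch == ']' and stack:
--             o = stack.pop()
--             rot = string[string.find('Rot', o, i) + 3:string.find('corridor', o, i)]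
--             chains[i] = chains.pop(o - 1, []) + [rot]
--     # splice back-to-front: inserting at the largest position first leaves
--     # every earlier insertion point untouched, so no offset bookkeeping
--     res = list(string)
--     for c in sorted(chains, reverse=True):
--         res.insert(c + 1, ''.join(sorted(set(chains[c]))) + 'intersection!(25)')
--     return ''.join(res)
-- ===== Notes on version B (the rewrite author's own statement) =====
-- stated objective: alternative
-- what changed: Replaces A's per-bracket find/index rescans (quadratic matching) and its inner scan over brackets[i:] with a single stack-based pass that matches each bracket and chains adjacent groups as their closes are popped, then splices the markers back-to-front by list insertion instead of A's forward full-string slicing with a running offset.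
import Mathlib
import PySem

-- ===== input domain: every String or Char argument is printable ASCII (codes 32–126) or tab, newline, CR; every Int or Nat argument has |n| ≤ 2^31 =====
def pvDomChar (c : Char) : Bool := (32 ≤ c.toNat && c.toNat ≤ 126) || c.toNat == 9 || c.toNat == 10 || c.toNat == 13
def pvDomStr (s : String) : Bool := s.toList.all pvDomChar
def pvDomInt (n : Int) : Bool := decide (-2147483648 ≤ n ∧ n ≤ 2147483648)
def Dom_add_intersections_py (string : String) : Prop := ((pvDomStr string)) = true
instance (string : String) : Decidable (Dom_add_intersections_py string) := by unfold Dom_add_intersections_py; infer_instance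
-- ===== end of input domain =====

-- B replaces A's repeated find/index bracket-matching rescans by a single stack pass that chains
-- adjacent groups as their closes are popped, then splices the markers back-to-front by list
-- insertion instead of forward full-string slicing with an offset (objective: alternative).

-- ===== PORT A =====

-- the `while ni_o != -1 and ...` loop; fuel only makes the loop total (it never runs out on any input)
def aScanLoop (s : List Char) : Nat → Int → Int → Option Int
  | 0, _, _ => none
  | fuel+1, idx_c, ni_o =>
    if ni_o ≠ -1 ∧ PySem.Chars.findFrom s ['['] ni_o none < idx_c then
      let j := PySem.Chars.findFrom s [']'] (idx_c + 1) none
      if j = -1 then none    -- string.index: ValueError (excluded by Pre_)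
      else aScanLoop s fuel j (PySem.Chars.findFrom s ['['] (ni_o + 1) none)
    else some idx_c

-- body of `for i, c in enumerate(string): if c == '[': ...`
def aStep1 (s : List Char) (acc : Option (List (Int × Int))) (ic : Int × Char) : Option (List (Int × Int)) :=
  match acc with
  | none => none
  | some bs =>
    if ic.2 = '[' then
      let idx_c := PySem.Chars.findFrom s [']'] ic.1 none
      if idx_c = -1 then none    -- string.index: ValueError (excluded by Pre_)
      else
        match aScanLoop s (s.length + 1) idx_c (PySem.Chars.findFrom s ['['] (ic.1 + 1) none) with
        | none => none
        | some c => some (bs ++ [(ic.1, c)])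
    else some bs

def aBrackets (s : List Char) : Option (List (Int × Int)) :=
  (PySem.List.enumerate s).foldl (aStep1 s) (some [])

-- `for t0, t1 in brackets[i:]: if b[1] == t0 - 1: ... break`
def aFindNb (b1 : Int) : List (Int × Int) → Option (Int × Int)
  | [] => none
  | t :: rest => if b1 = t.1 - 1 then some t else aFindNb b1 rest

-- rot = string[string.find('Rot', b[0], b[1]) + 3 : string.find('corridor', b[0], b[1])]
def aRot (s : List Char) (b : Int × Int) : List Char :=
  PySem.Chars.slice s (some (PySem.Chars.findFrom s ['R','o','t'] b.1 (some b.2) + 3))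
                     (some (PySem.Chars.findFrom s ['c','o','r','r','i','d','o','r'] b.1 (some b.2)))

-- body of `for i, b in enumerate(brackets): ...`
def aStep2 (s : List Char) (brackets : List (Int × Int)) (to_add : PySem.Dict Int (List (List Char)))
    (ib : Int × (Int × Int)) : PySem.Dict Int (List (List Char)) :=
  let b := ib.2
  let rot := aRot s b
  match aFindNb b.2 (PySem.List.slice brackets (some ib.1) none) with
  | some t =>
    match to_add.get? b.2 with
    | none => to_add.insert t.2 [rot]
    | some v => (to_add.insert t.2 (v ++ [rot])).erase b.2
  | none =>
    match to_add.get? b.2 with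
    | none => to_add.insert b.2 [rot]
    | some v => to_add.insert b.2 (v ++ [rot])

def aToAdd (s : List Char) (brackets : List (Int × Int)) : PySem.Dict Int (List (List Char)) :=
  (PySem.List.enumerate brackets).foldl (aStep2 s brackets) ⟨[]⟩

-- body of `for i in sorted(list(to_add.keys())): ...` (state: current string, offset)
def aStep3 (to_add : PySem.Dict Int (List (List Char))) (st : List Char × Int) (i : Int) : List Char × Int :=
  let rot := PySem.Chars.join [] (PySem.List.sorted (PySem.Set.ofList (to_add.getD i [])) (fun x => x) false)
  let ins := rot ++ ['i','n','t','e','r','s','e','c','t','i','o','n','!','(','2','5',')']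
  (PySem.Chars.slice st.1 none (some (i + 1 + st.2)) ++ ins ++ PySem.Chars.slice st.1 (some (i + 1 + st.2)) none,
   st.2 + (ins.length : Int))

def aInsert (s : List Char) (to_add : PySem.Dict Int (List (List Char))) : List Char :=
  ((PySem.List.sorted to_add.keys (fun x => x) false).foldl (aStep3 to_add) (s, (0:Int))).1

def add_intersections_py (string : String) : String :=
  let s := string.toList
  match aBrackets s with
  | none => string    -- a '[' without enough ']': string.index raises ValueError (excluded by Pre_)
  | some brackets => String.ofList (aInsert s (aToAdd s brackets))

-- ===== PORT B =====

-- the single scan `for i, ch in enumerate(string): ...` as structural recursion over the characters,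
-- carrying the position i, the stack of open positions and the chains dict keyed by close positions
def nGo (s : List Char) : List Char → Int → List Int → PySem.Dict Int (List (List Char)) →
    PySem.Dict Int (List (List Char))
  | [], _, _, chains => chains
  | ch :: rest, i, stack, chains =>
    if ch = '[' then nGo s rest (i + 1) (stack ++ [i]) chains
    else if ch = ']' ∧ stack ≠ [] then
      match PySem.List.pop? stack with
      | some (o, stack') =>
          nGo s rest (i + 1) stack'
            ((chains.erase (o - 1)).insert i
              ((chains.getD (o - 1) []) ++
                [PySem.Chars.slice s (some (PySem.Chars.findFrom s ['R','o','t'] o (some i) + 3))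
                                    (some (PySem.Chars.findFrom s ['c','o','r','r','i','d','o','r'] o (some i)))]))
      | none => nGo s rest (i + 1) stack chains
    else nGo s rest (i + 1) stack chains

-- `for c in sorted(chains, reverse=True): res.insert(c + 1, ...)`
def nPut (chains : PySem.Dict Int (List (List Char))) : List Int → List (List Char) → List (List Char)
  | [], res => res
  | c :: ks, res =>
    nPut chains ks
      (PySem.List.insert res (c + 1)
        (PySem.Chars.join [] (PySem.List.sorted (PySem.Set.ofList (chains.getD c [])) (fun x => x) false)
          ++ ['i','n','t','e','r','s','e','c','t','i','o','n','!','(','2','5',')']))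

def nSplice (s : List Char) (chains : PySem.Dict Int (List (List Char))) : List Char :=
  PySem.Chars.join []
    (nPut chains (PySem.List.sorted chains.keys (fun x => x) true) (s.map (fun ch => [ch])))

def add_intersections_py_alt (string : String) : String :=
  let s := string.toList
  String.ofList (nSplice s (nGo s s 0 [] PySem.Dict.empty))

-- ===== PRECONDITION & SPEC =====

-- the clamped unmatched-open counter of a prefix
def preCnt (n : Nat) (c : Char) : Nat := if c = '[' then n + 1 else if c = ']' then n - 1 else n

-- Pre_ excludes exactly the strings with a '[' that never gets matched: there Python's
-- string.index(']', ...) raises ValueError.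
def Pre_add_intersections_py (string : String) : Prop :=
  string.toList.foldl preCnt 0 = 0

instance (string : String) : Decidable (Pre_add_intersections_py string) := by
  unfold Pre_add_intersections_py; infer_instance

def pvWitness_add_intersections_py : String := "a[Rot1corridor]b"

def Spec_add_intersections_py (string : String) (out : String) : Prop := out = add_intersections_py_alt string
instance (string : String) (out : String) : Decidable (Spec_add_intersections_py string out) := by
  unfold Spec_add_intersections_py; infer_instance

-- ===== CLAIM (what is proved, stated in full; the proofs are below) =====
def Claim_equal_add_intersections_py : Prop := ∀ (string : String), Dom_add_intersections_py string → Pre_add_intersections_py string → Spec_add_intersections_py string (add_intersections_py string)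

-- ===== LEMMAS AND PROOFS =====

-- ---------- generic list utilities ----------

theorem occ_lt {alpha : Type} (s : List alpha) {j : Nat} {c : alpha} (h : s[j]? = some c) :
    j < s.length := by
  by_contra hc
  rw [List.getElem?_eq_none (by omega)] at h
  cases h

theorem join_nil_eq_flatten (X : List (List Char)) : PySem.Chars.join [] X = X.flatten := by
  show List.intercalate [] X = X.flatten
  rw [List.intercalate]
  induction X with
  | nil => rfl
  | cons a X ih =>
    cases X with
    | nil => simp
    | cons b Y => simp_all

theorem singleton_prefix_iff (l : List Char) (c : Char) : [c] <+: l ↔ l[0]? = some c := by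
  cases l with
  | nil => simp
  | cons a t => simp [List.cons_prefix_cons, eq_comm]

theorem singleton_infix_iff (l : List Char) (c : Char) : [c] <:+: l ↔ c ∈ l := by
  constructor
  · intro h
    exact h.sublist.subset (List.mem_singleton_self c)
  · intro h
    obtain ⟨l1, l2, rfl⟩ := List.append_of_mem h
    exact ⟨l1, l2, by simp⟩

theorem eraseIdx_concat {alpha : Type} : ∀ (js : List alpha) (x : alpha),
    (js ++ [x]).eraseIdx js.length = js
  | [], x => rfl
  | a :: t, x => by
    simp only [List.cons_append, List.length_cons, List.eraseIdx_cons_succ]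
    rw [eraseIdx_concat t x]

theorem pop?_concat {alpha : Type} (js : List alpha) (x : alpha) :
    PySem.List.pop? (js ++ [x]) = some (x, js) := by
  unfold PySem.List.pop? PySem.List.pyIdx?
  have hlen : (js ++ [x]).length = js.length + 1 := by simp
  rw [hlen]
  have h1 : ¬ ((0:Int) ≤ -1) := by omega
  have h2 : -(((js.length + 1 : Nat) : Int)) ≤ -1 := by push_cast; omega
  simp only [h1, if_false, h2, if_true]
  have h3 : (js.length + 1) - (-(-1:Int)).toNat = js.length := by simp
  rw [h3]
  have h4 : (js ++ [x])[js.length]? = some x := by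
    rw [List.getElem?_append_right (by omega)]
    simp
  simp [h4, eraseIdx_concat]

-- ---------- Dict lemmas ----------

theorem dict_get?_eq_find? {kappa nu : Type} [BEq kappa] (d : PySem.Dict kappa nu) (k : kappa) :
    d.get? k = (d.items.find? (fun p => p.1 == k)).map (fun p => p.2) := rfl

theorem dict_contains_iff {kappa nu : Type} [BEq kappa] [LawfulBEq kappa]
    (d : PySem.Dict kappa nu) (k : kappa) :
    d.contains k = true ↔ k ∈ d.keys := by
  show (d.items.any fun p => p.1 == k) = true ↔ k ∈ d.items.map (fun p => p.1)
  rw [List.any_eq_true]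
  constructor
  · rintro ⟨p, hp, he⟩
    exact List.mem_map.mpr ⟨p, hp, by simpa using he⟩
  · intro h
    obtain ⟨p, hp, he⟩ := List.mem_map.mp h
    exact ⟨p, hp, by simp [he]⟩

theorem find?_map_replace_self {kappa nu : Type} [BEq kappa] [LawfulBEq kappa] :
    ∀ (l : List (kappa × nu)) (k : kappa) (v : nu), (l.any fun p => p.1 == k) = true →
    (l.map (fun p => if p.1 == k then (k, v) else p)).find? (fun p => p.1 == k) = some (k, v)
  | [], _, _, h => by simp at h
  | p :: t, k, v, h => by
    by_cases hp : (p.1 == k) = true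
    · simp [hp]
    · have ht : (t.any fun p => p.1 == k) = true := by
        simp only [List.any_cons, hp, Bool.false_or] at h
        exact h
      simp [hp, find?_map_replace_self t k v ht]

theorem find?_map_replace_ne {kappa nu : Type} [BEq kappa] [LawfulBEq kappa] :
    ∀ (l : List (kappa × nu)) (k k' : kappa) (v : nu), k' ≠ k →
    (l.map (fun p => if p.1 == k then (k, v) else p)).find? (fun p => p.1 == k') =
      l.find? (fun p => p.1 == k')
  | [], _, _, _, _ => rfl
  | p :: t, k, k', v, hne => by
    by_cases hp : (p.1 == k) = true
    · have hpk : p.1 = k := by simpa using hp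
      have h1 : (k == k') = false := by simp [Ne.symm hne]
      have h2 : (p.1 == k') = false := by simp [hpk, Ne.symm hne]
      simp [hp, h1, h2, find?_map_replace_ne t k k' v hne]
    · by_cases hq : (p.1 == k') = true
      · simp [hp, hq]
      · simp [hp, hq, find?_map_replace_ne t k k' v hne]

theorem find?_filter_self {kappa nu : Type} [BEq kappa] [LawfulBEq kappa]
    (l : List (kappa × nu)) (k : kappa) :
    (l.filter fun p => !(p.1 == k)).find? (fun p => p.1 == k) = none := by
  rw [List.find?_eq_none]
  intro x hx
  have h2 := (List.mem_filter.mp hx).2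
  simp at h2
  simp [h2]

theorem find?_filter_ne {kappa nu : Type} [BEq kappa] [LawfulBEq kappa] :
    ∀ (l : List (kappa × nu)) (k k' : kappa), k' ≠ k →
    (l.filter fun p => !(p.1 == k)).find? (fun p => p.1 == k') = l.find? (fun p => p.1 == k')
  | [], _, _, _ => rfl
  | p :: t, k, k', hne => by
    by_cases hp : (p.1 == k) = true
    · have hpk : p.1 = k := by simpa using hp
      have h2 : (p.1 == k') = false := by simp [hpk, Ne.symm hne]
      simp [List.filter_cons, hp, h2, find?_filter_ne t k k' hne]
    · by_cases hq : (p.1 == k') = true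
      · simp [List.filter_cons, hp, hq]
      · simp [List.filter_cons, hp, hq, find?_filter_ne t k k' hne]

theorem dict_insert_eq {kappa nu : Type} [BEq kappa] (d : PySem.Dict kappa nu) (k : kappa) (v : nu) :
    d.insert k v = if d.contains k = true then
        PySem.Dict.mk (d.items.map fun p => if p.1 == k then (k, v) else p)
      else PySem.Dict.mk (d.items ++ [(k, v)]) := rfl

theorem dict_get?_insert {kappa nu : Type} [BEq kappa] [LawfulBEq kappa] [DecidableEq kappa]
    (d : PySem.Dict kappa nu) (k : kappa) (v : nu) (k' : kappa) :
    (d.insert k v).get? k' = if k' = k then some v else d.get? k' := by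
  rw [dict_insert_eq]
  by_cases hc : d.contains k = true
  · rw [if_pos hc]
    by_cases hk : k' = k
    · subst hk
      rw [if_pos rfl, dict_get?_eq_find?]
      show ((d.items.map fun p => if p.1 == k' then (k', v) else p).find? (fun p => p.1 == k')).map _ = _
      rw [find?_map_replace_self d.items k' v hc]
      rfl
    · rw [if_neg hk, dict_get?_eq_find?, dict_get?_eq_find?]
      show ((d.items.map fun p => if p.1 == k then (k, v) else p).find? (fun p => p.1 == k')).map _ = _
      rw [find?_map_replace_ne d.items k k' v hk]
  · rw [if_neg hc]
    rw [dict_get?_eq_find?, dict_get?_eq_find?]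
    show ((d.items ++ [(k, v)]).find? (fun p => p.1 == k')).map _ = _
    rw [List.find?_append]
    by_cases hk : k' = k
    · subst hk
      have h1 : d.items.find? (fun p => p.1 == k') = none := by
        rw [List.find?_eq_none]
        intro x hx hbx
        apply hc
        show (d.items.any fun p => p.1 == k') = true
        rw [List.any_eq_true]
        exact ⟨x, hx, hbx⟩
      rw [if_pos rfl, h1]
      simp
    · have h2 : ([((k : kappa), v)].find? (fun p => p.1 == k')) = none := by
        simp [Ne.symm hk]
      rw [if_neg hk, h2]
      simp

theorem dict_erase_eq {kappa nu : Type} [BEq kappa] (d : PySem.Dict kappa nu) (k : kappa) :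
    d.erase k = PySem.Dict.mk (d.items.filter fun p => !(p.1 == k)) := rfl

theorem dict_get?_erase {kappa nu : Type} [BEq kappa] [LawfulBEq kappa] [DecidableEq kappa]
    (d : PySem.Dict kappa nu) (k k' : kappa) :
    (d.erase k).get? k' = if k' = k then none else d.get? k' := by
  rw [dict_erase_eq, dict_get?_eq_find?, dict_get?_eq_find?]
  by_cases hk : k' = k
  · subst hk
    show ((d.items.filter fun p => !(p.1 == k')).find? (fun p => p.1 == k')).map _ = _
    rw [find?_filter_self, if_pos rfl]
    rfl
  · show ((d.items.filter fun p => !(p.1 == k)).find? (fun p => p.1 == k')).map _ = _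
    rw [find?_filter_ne d.items k k' hk, if_neg hk]

theorem dict_keys_eq {kappa nu : Type} (d : PySem.Dict kappa nu) :
    d.keys = d.items.map (fun p => p.1) := rfl

theorem dict_keys_insert {kappa nu : Type} [BEq kappa] [LawfulBEq kappa]
    (d : PySem.Dict kappa nu) (k : kappa) (v : nu) :
    (d.insert k v).keys = if k ∈ d.keys then d.keys else d.keys ++ [k] := by
  rw [dict_insert_eq]
  by_cases hc : d.contains k = true
  · rw [if_pos hc, if_pos ((dict_contains_iff d k).mp hc)]
    show (d.items.map fun p => if p.1 == k then (k, v) else p).map (fun p => p.1) = _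
    rw [List.map_map, dict_keys_eq]
    apply List.map_congr_left
    intro p _
    by_cases hp : (p.1 == k) = true
    · have : p.1 = k := by simpa using hp
      simp [hp, this]
    · simp [hp]
  · rw [if_neg hc, if_neg (fun h => hc ((dict_contains_iff d k).mpr h))]
    show (d.items ++ [(k, v)]).map (fun p => p.1) = _
    simp [dict_keys_eq]

theorem dict_keys_erase {kappa nu : Type} [BEq kappa] [LawfulBEq kappa]
    (d : PySem.Dict kappa nu) (k : kappa) :
    (d.erase k).keys = d.keys.filter (fun x => !(x == k)) := by
  rw [dict_erase_eq, dict_keys_eq, dict_keys_eq]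
  induction d.items with
  | nil => rfl
  | cons p t ih =>
    by_cases hp : (p.1 == k) = true
    · simp [List.filter_cons, hp, ih]
    · simp [List.filter_cons, hp, ih]

theorem dict_mem_keys {kappa nu : Type} [BEq kappa] [LawfulBEq kappa]
    (d : PySem.Dict kappa nu) (k : kappa) :
    k ∈ d.keys ↔ (d.get? k).isSome := by
  rw [dict_get?_eq_find?, dict_keys_eq]
  constructor
  · intro h
    obtain ⟨p, hp, he⟩ := List.mem_map.mp h
    have h2 : (List.find? (fun q => q.1 == k) d.items).isSome :=
      List.find?_isSome.mpr ⟨p, hp, by simp [he]⟩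
    simpa using h2
  · intro h
    have h2 : (List.find? (fun q => q.1 == k) d.items).isSome := by simpa using h
    obtain ⟨p, hp, hpk⟩ := List.find?_isSome.mp h2
    exact List.mem_map.mpr ⟨p, hp, by simpa using hpk⟩

theorem dict_keys_nodup_insert {kappa nu : Type} [BEq kappa] [LawfulBEq kappa]
    (d : PySem.Dict kappa nu) (k : kappa) (v : nu) (h : d.keys.Nodup) :
    (d.insert k v).keys.Nodup := by
  rw [dict_keys_insert]
  by_cases hm : k ∈ d.keys
  · simpa [hm] using h
  · rw [if_neg hm]
    refine List.Nodup.append h (List.nodup_singleton k) ?_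
    intro a ha hak
    simp at hak
    exact hm (hak ▸ ha)

theorem dict_keys_nodup_erase {kappa nu : Type} [BEq kappa] [LawfulBEq kappa]
    (d : PySem.Dict kappa nu) (k : kappa) (h : d.keys.Nodup) :
    (d.erase k).keys.Nodup := by
  rw [dict_keys_erase]
  exact h.filter _

theorem dict_getD_eq {kappa nu : Type} [BEq kappa] (d : PySem.Dict kappa nu) (k : kappa) (v : nu) :
    d.getD k v = (d.get? k).getD v := rfl

theorem dict_get?_of_mem_items {kappa nu : Type} [BEq kappa] [LawfulBEq kappa]
    (d : PySem.Dict kappa nu) (k : kappa) (v : nu)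
    (hn : d.keys.Nodup) (hm : (k, v) ∈ d.items) : d.get? k = some v := by
  obtain ⟨l⟩ := d
  rw [dict_get?_eq_find?]
  rw [dict_keys_eq] at hn
  show (l.find? (fun p => p.1 == k)).map (fun p => p.2) = some v
  replace hn : (l.map (fun p => p.1)).Nodup := hn
  replace hm : (k, v) ∈ l := hm
  induction l with
  | nil => simp at hm
  | cons p t ih =>
    rw [List.map_cons, List.nodup_cons] at hn
    rcases List.mem_cons.mp hm with h | h
    · rw [← h]
      simp
    · have hne : (p.1 == k) = false := by
        have hmem : k ∈ t.map (fun p => p.1) := List.mem_map.mpr ⟨(k, v), h, rfl⟩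
        have hpk : p.1 ≠ k := fun he => hn.1 (he ▸ hmem)
        simp [hpk]
      rw [List.find?_cons_of_neg (by simp [hne])]
      exact ih hn.2 h

theorem dict_empty_get? {kappa nu : Type} [BEq kappa] (k : kappa) :
    (PySem.Dict.mk ([] : List (kappa × nu))).get? k = none := rfl

-- ---------- prefix counters ----------

def cnt (s : List Char) (c : Char) (x : Nat) : Nat := (s.take x).count c

theorem cnt_succ (s : List Char) (c : Char) (x : Nat) (hx : x < s.length) :
    cnt s c (x+1) = cnt s c x + if s[x]? = some c then 1 else 0 := by
  unfold cnt
  rw [List.take_succ, List.count_append, List.getElem?_eq_getElem hx]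
  by_cases h : s[x] = c
  · simp [h]
  · simp [h, Option.some_inj]

theorem cnt_mono (s : List Char) (c : Char) {a b : Nat} (h : a ≤ b) :
    cnt s c a ≤ cnt s c b := by
  unfold cnt
  have h2 : s.take a = (s.take b).take a := by
    rw [List.take_take, min_eq_left h]
  rw [h2]
  exact (List.take_sublist _ _).count_le _

theorem cnt_congr (s : List Char) (c : Char) {a b : Nat} (h : a ≤ b)
    (hno : ∀ j, a ≤ j → j < b → s[j]? ≠ some c) :
    cnt s c b = cnt s c a := by
  induction b, h using Nat.le_induction with
  | base => rfl
  | succ b hb ih =>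
    have hb' : cnt s c b = cnt s c a := ih (fun j hj1 hj2 => hno j hj1 (by omega))
    by_cases hlen : b < s.length
    · rw [cnt_succ s c b hlen, hb', if_neg (hno b hb (by omega))]
      omega
    · have e1 : s.take (b+1) = s.take b := by
        rw [List.take_of_length_le (by omega), List.take_of_length_le (by omega)]
      unfold cnt
      rw [e1]
      exact hb'

theorem cnt_next (s : List Char) (ch : Char) {a j : Nat} (hj : s[j]? = some ch) (haj : a ≤ j)
    (hmin : ∀ j', a ≤ j' → j' < j → s[j']? ≠ some ch) :
    cnt s ch (j+1) = cnt s ch a + 1 := by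
  have hjl : j < s.length := occ_lt s hj
  rw [cnt_succ s ch j hjl, cnt_congr s ch haj hmin, if_pos hj]

-- ---------- the matching-close specification ----------

def mclose : List Char → Nat → Nat → Option Nat
  | [], _, _ => none
  | ch :: t, j, d =>
    if ch = ']' then (if d = 0 then some j else mclose t (j+1) (d-1))
    else if ch = '[' then mclose t (j+1) (d+1)
    else mclose t (j+1) d

def mAt (s : List Char) (i : Nat) : Option Nat := mclose (s.drop (i+1)) (i+1) 0

def clOf (s : List Char) (i : Nat) : Nat := (mAt s i).getD 0

theorem mclose_spec : ∀ (l : List Char) (j d c : Nat), mclose l j d = some c →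
    ∃ q, c = j + q ∧ q < l.length ∧ l[q]? = some ']' ∧
      (l.take q).count ']' = d + (l.take q).count '[' ∧
      ∀ q' ≤ q, (l.take q').count ']' ≤ d + (l.take q').count '['
  | [], j, d, c, h => by simp [mclose] at h
  | ch :: t, j, d, c, h => by
    by_cases h1 : ch = ']'
    · subst h1
      by_cases h2 : d = 0
      · subst h2
        have hc : c = j := by
          simp [mclose] at h
          omega
        subst hc
        refine ⟨0, by omega, by simp, by simp, by simp, ?_⟩
        intro q' hq'
        interval_cases q' <;> simp
      · have h' : mclose t (j+1) (d-1) = some c := by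
          simpa [mclose, h2] using h
        obtain ⟨q, hq1, hq2, hq3, hq4, hq5⟩ := mclose_spec t (j+1) (d-1) c h'
        refine ⟨q+1, by omega, by simp; omega, by simpa using hq3, ?_, ?_⟩
        · simp [List.take_succ_cons, List.count_cons]
          all_goals omega
        · intro q' hq'
          cases q' with
          | zero => simp
          | succ q'' =>
            have := hq5 q'' (by omega)
            simp [List.take_succ_cons, List.count_cons]
            all_goals omega
    · by_cases h3 : ch = '['
      · subst h3
        have h' : mclose t (j+1) (d+1) = some c := by simpa [mclose] using h
        obtain ⟨q, hq1, hq2, hq3, hq4, hq5⟩ := mclose_spec t (j+1) (d+1) c h'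
        refine ⟨q+1, by omega, by simp; omega, by simpa using hq3, ?_, ?_⟩
        · simp [List.take_succ_cons, List.count_cons]
          all_goals omega
        · intro q' hq'
          cases q' with
          | zero => simp
          | succ q'' =>
            have := hq5 q'' (by omega)
            simp [List.take_succ_cons, List.count_cons]
            all_goals omega
      · have h' : mclose t (j+1) d = some c := by simpa [mclose, h1, h3] using h
        obtain ⟨q, hq1, hq2, hq3, hq4, hq5⟩ := mclose_spec t (j+1) d c h'
        have e1 : (ch == ']') = false := by simp [h1]
        have e2 : (ch == '[') = false := by simp [h3]
        refine ⟨q+1, by omega, by simp; omega, by simpa using hq3, ?_, ?_⟩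
        · simp [List.take_succ_cons, List.count_cons, e1, e2]
          all_goals omega
        · intro q' hq'
          cases q' with
          | zero => simp
          | succ q'' =>
            have := hq5 q'' (by omega)
            simp [List.take_succ_cons, List.count_cons, e1, e2]
            all_goals omega

theorem cnt_shift (s : List Char) (ch : Char) (i x : Nat) :
    cnt s ch (i + x) = cnt s ch i + ((s.drop i).take x).count ch := by
  unfold cnt
  rw [List.take_add, List.count_append]

theorem mAt_spec (s : List Char) (i c : Nat) (h : mAt s i = some c) :
    i < c ∧ c < s.length ∧ s[c]? = some ']' ∧
    cnt s ']' c + cnt s '[' (i+1) = cnt s ']' (i+1) + cnt s '[' c ∧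
    ∀ x, i+1 ≤ x → x ≤ c → cnt s ']' x + cnt s '[' (i+1) ≤ cnt s ']' (i+1) + cnt s '[' x := by
  obtain ⟨q, hq1, hq2, hq3, hq4, hq5⟩ := mclose_spec _ _ _ _ h
  have hlen : (s.drop (i+1)).length = s.length - (i+1) := by simp
  have hcn : c < s.length := by omega
  have hic : i < c := by omega
  have hocc : s[c]? = some ']' := by
    have : (s.drop (i+1))[q]? = s[(i+1) + q]? := List.getElem?_drop
    rw [this] at hq3
    have : (i+1) + q = c := by omega
    rwa [this] at hq3
  refine ⟨hic, hcn, hocc, ?_, ?_⟩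
  · have e1 := cnt_shift s ']' (i+1) q
    have e2 := cnt_shift s '[' (i+1) q
    have hce : i + 1 + q = c := by omega
    rw [hce] at e1 e2
    omega
  · intro x hx1 hx2
    have hq' := hq5 (x - (i+1)) (by omega)
    have e1 := cnt_shift s ']' (i+1) (x - (i+1))
    have e2 := cnt_shift s '[' (i+1) (x - (i+1))
    have hce : i + 1 + (x - (i+1)) = x := by omega
    rw [hce] at e1 e2
    omega

theorem mclose_step_other (s : List Char) (k d : Nat) (hk : k < s.length)
    (h1 : s[k]? ≠ some ']') :
    mclose (s.drop k) k d = mclose (s.drop (k+1)) (k+1) (if s[k]? = some '[' then d + 1 else d) := by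
  rw [List.drop_eq_getElem_cons hk]
  have hg : s[k]? = some s[k] := List.getElem?_eq_getElem hk
  by_cases h2 : s[k] = '['
  · rw [if_pos (by rw [hg, h2])]
    have h3 : s[k] ≠ ']' := by rw [h2]; decide
    simp [mclose, h3, h2]
  · rw [if_neg (by rw [hg]; simp [h2])]
    have h3 : s[k] ≠ ']' := fun he => h1 (by rw [hg, he])
    simp [mclose, h3, h2]

theorem mclose_step_close (s : List Char) (k d : Nat) (hk : k < s.length)
    (h1 : s[k]? = some ']') :
    mclose (s.drop k) k d = if d = 0 then some k else mclose (s.drop (k+1)) (k+1) (d-1) := by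
  rw [List.drop_eq_getElem_cons hk]
  have h2 : s[k] = ']' := by
    have hg : s[k]? = some s[k] := List.getElem?_eq_getElem hk
    rw [hg] at h1
    exact Option.some_inj.mp h1
  simp [mclose, h2]

-- ---------- findFrom on a single character ----------

theorem findFrom_char (s : List Char) (ch : Char) (k : Nat) (hk : k ≤ s.length) :
    (∃ j : Nat, PySem.Chars.findFrom s [ch] (↑k) none = ↑j ∧ k ≤ j ∧ j < s.length ∧
       s[j]? = some ch ∧ ∀ j', k ≤ j' → j' < j → s[j']? ≠ some ch) ∨
    (PySem.Chars.findFrom s [ch] (↑k) none = -1 ∧ ∀ j', k ≤ j' → j' < s.length → s[j']? ≠ some ch) := by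
  rw [PySem.Chars.findFrom_natCast s [ch] k hk]
  by_cases h : PySem.Chars.find (s.drop k) [ch] = -1
  · right
    refine ⟨by simp [h], ?_⟩
    intro j' h1 h2 hc
    rw [PySem.Chars.find_eq_neg_one_iff] at h
    apply h
    rw [singleton_infix_iff]
    have : (s.drop k)[j' - k]? = s[k + (j' - k)]? := List.getElem?_drop
    have he : k + (j' - k) = j' := by omega
    rw [he] at this
    exact List.mem_of_getElem? (this ▸ hc)
  · left
    have h0 : (0:Int) ≤ PySem.Chars.find (s.drop k) [ch] := by
      have := PySem.Chars.neg_one_le_find (s.drop k) [ch]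
      omega
    obtain ⟨hpre, hmin⟩ := PySem.Chars.find_spec h0
    set f := (PySem.Chars.find (s.drop k) [ch]).toNat with hf
    have hfind : PySem.Chars.find (s.drop k) [ch] = (f : Int) := by
      rw [hf, Int.toNat_of_nonneg h0]
    have hdd : (s.drop k).drop f = s.drop (k + f) := by
      simp [List.drop_drop, Nat.add_comm]
    rw [hdd] at hpre
    have hocc : s[k + f]? = some ch := by
      rw [singleton_prefix_iff] at hpre
      have : (s.drop (k+f))[0]? = s[(k+f) + 0]? := List.getElem?_drop
      rw [this] at hpre
      simpa using hpre
    refine ⟨k + f, ?_, by omega, occ_lt s hocc, hocc, ?_⟩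
    · rw [if_neg h, hfind]
      push_cast
      ring
    · intro j' h1 h2
      have := hmin (j' - k) (by omega)
      rw [List.drop_drop] at this
      have he2 : k + (j' - k) = j' := by omega
      have he3 : j' - k + k = j' := by omega
      simp only [he2, he3] at this
      intro hc
      apply this
      rw [singleton_prefix_iff]
      have hgd : (s.drop j')[0]? = s[j' + 0]? := List.getElem?_drop
      rw [hgd]
      simpa using hc

theorem findFrom_self (s : List Char) (ch : Char) (u : Nat) (hu : s[u]? = some ch) :
    PySem.Chars.findFrom s [ch] (↑u) none = ↑u := by
  have hul : u < s.length := occ_lt s hu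
  rcases findFrom_char s ch u (by omega) with ⟨j, hj1, hj2, hj3, hj4, hj5⟩ | ⟨h1, h2⟩
  · by_cases hje : j = u
    · rw [hj1, hje]
    · exact absurd hu (hj5 u (le_refl u) (by omega))
  · exact absurd hu (h2 u (le_refl u) hul)

-- ---------- open positions ----------

def oGo : List Char → Nat → List Nat
  | [], _ => []
  | ch :: t, k => if ch = '[' then k :: oGo t (k+1) else oGo t (k+1)

def opens (s : List Char) : List Nat := oGo s 0

theorem oGo_cons_open (t : List Char) (k : Nat) : oGo ('[' :: t) k = k :: oGo t (k+1) := by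
  simp [oGo]

theorem oGo_cons_other (ch : Char) (t : List Char) (k : Nat) (h : ch ≠ '[') :
    oGo (ch :: t) k = oGo t (k+1) := by
  simp [oGo, h]

theorem mem_oGo : ∀ (l : List Char) (k u : Nat),
    u ∈ oGo l k ↔ ∃ q, q < l.length ∧ u = k + q ∧ l[q]? = some '['
  | [], k, u => by simp [oGo]
  | ch :: t, k, u => by
    by_cases h : ch = '['
    · subst h
      rw [oGo_cons_open]
      constructor
      · intro hm
        rcases List.mem_cons.mp hm with he | hm2
        · exact ⟨0, by simp, by omega, by simp⟩
        · obtain ⟨q, hq, he, hocc⟩ := (mem_oGo t (k+1) u).mp hm2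
          exact ⟨q+1, by simp; omega, by omega, by simpa using hocc⟩
      · rintro ⟨q, hq, he, hocc⟩
        rcases Nat.eq_zero_or_pos q with rfl | hqpos
        · exact List.mem_cons.mpr (Or.inl (by omega))
        · obtain ⟨q', rfl⟩ : ∃ q', q = q' + 1 := ⟨q - 1, by omega⟩
          refine List.mem_cons.mpr (Or.inr ((mem_oGo t (k+1) u).mpr
            ⟨q', by simp at hq; omega, by omega, by simpa using hocc⟩))
    · rw [oGo_cons_other ch t k h]
      rw [mem_oGo t (k+1) u]
      constructor
      · rintro ⟨q, hq, he, hocc⟩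
        exact ⟨q+1, by simp; omega, by omega, by simpa using hocc⟩
      · rintro ⟨q, hq, he, hocc⟩
        rcases Nat.eq_zero_or_pos q with rfl | hqpos
        · exfalso
          apply h
          simpa using hocc
        · obtain ⟨q', rfl⟩ : ∃ q', q = q' + 1 := ⟨q - 1, by omega⟩
          exact ⟨q', by simp at hq; omega, by omega, by simpa using hocc⟩

theorem oGo_pairwise : ∀ (l : List Char) (k : Nat), (oGo l k).Pairwise (· < ·)
  | [], _ => by simp [oGo]
  | ch :: t, k => by
    by_cases h : ch = '['
    · subst h
      rw [oGo_cons_open, List.pairwise_cons]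
      refine ⟨?_, oGo_pairwise t (k+1)⟩
      intro u hu
      obtain ⟨q, _, rfl, _⟩ := (mem_oGo t (k+1) u).mp hu
      omega
    · rw [oGo_cons_other ch t k h]
      exact oGo_pairwise t (k+1)

theorem mem_opens (s : List Char) (u : Nat) :
    u ∈ opens s ↔ u < s.length ∧ s[u]? = some '[' := by
  rw [opens, mem_oGo]
  constructor
  · rintro ⟨q, hq, rfl, hocc⟩
    simpa using ⟨hq, hocc⟩
  · rintro ⟨hu, hocc⟩
    exact ⟨u, hu, by omega, hocc⟩

theorem opens_pairwise (s : List Char) : (opens s).Pairwise (· < ·) := oGo_pairwise s 0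

theorem opens_nodup (s : List Char) : (opens s).Nodup :=
  (opens_pairwise s).imp (fun h => Nat.ne_of_lt h)

-- ---------- phase 1, A side: the scan loop finds the matching close ----------

theorem aScanLoop_inv (s : List Char) (i c : Nat)
    (hccl : s[c]? = some ']') (hcn : c < s.length)
    (F1 : cnt s ']' c + cnt s '[' (i+1) = cnt s ']' (i+1) + cnt s '[' c)
    (F2 : ∀ x, i+1 ≤ x → x ≤ c → cnt s ']' x + cnt s '[' (i+1) ≤ cnt s ']' (i+1) + cnt s '[' x) :
    ∀ (fuel : Nat) (p : Nat) (r : Int) (t : Nat),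
      c < p + fuel →
      s[p]? = some ']' → p ≤ c →
      cnt s ']' (p+1) = cnt s ']' (i+1) + t + 1 →
      ((r = -1 ∧ cnt s '[' s.length ≤ cnt s '[' (i+1) + t) ∨
       (∃ u : Nat, r = (u:Int) ∧ i < u ∧ s[u]? = some '[' ∧ cnt s '[' (u+1) = cnt s '[' (i+1) + t + 1)) →
      aScanLoop s fuel (↑p) r = some (↑c) := by
  intro fuel
  induction fuel with
  | zero =>
    intro p r t hf hpc hple hNC hr
    omega
  | succ fuel ih =>
    intro p r t hf hpc hple hNC hr
    have hpn : p < s.length := occ_lt s hpc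
    rcases hr with ⟨hr1, hr2⟩ | ⟨u, hru, hiu, hu, hNO⟩
    · have hp : p = c := by
        by_contra hne
        have hplt : p < c := lt_of_le_of_ne hple hne
        have hip : i + 1 ≤ p + 1 := by
          by_contra hip'
          have hle : p + 1 ≤ i + 1 := by omega
          have := cnt_mono s ']' hle
          omega
        have h2 := F2 (p+1) hip (by omega)
        have hm := cnt_mono s '[' (show p+1 ≤ s.length by omega)
        omega
      subst hp
      subst hr1
      simp only [aScanLoop]
      rw [if_neg (by rintro ⟨h1, _⟩; exact h1 rfl)]
    · subst hru
      have hun : u < s.length := occ_lt s hu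
      have hself : PySem.Chars.findFrom s ['['] (↑u) none = (↑u : Int) := findFrom_self s '[' u hu
      by_cases hcond : u < p
      · have hplt : p < c := by
          by_contra hple'
          have hpc' : p = c := by omega
          subst hpc'
          have hm1 := cnt_mono s '[' (show u+1 ≤ p by omega)
          have hm2 := cnt_mono s '[' (show p ≤ p+1 by omega)
          have h1 : cnt s ']' (p+1) = cnt s ']' p + 1 := by
            rw [cnt_succ s ']' p hpn, if_pos hpc]
          omega
        have huc : u < c := by omega
        have hNOc : cnt s '[' (i+1) + t + 1 ≤ cnt s '[' c := by
          have := cnt_mono s '[' (show u+1 ≤ c by omega)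
          omega
        have hNCc1 : cnt s ']' (c+1) = cnt s ']' c + 1 := by
          rw [cnt_succ s ']' c hcn, if_pos hccl]
        have hgt : cnt s ']' (p+1) < cnt s ']' (c+1) := by omega
        rcases findFrom_char s ']' (p+1) (by omega) with
          ⟨j2, hj2eq, hj2ge, hj2lt, hj2occ, hj2min⟩ | ⟨hneg, hnone⟩
        · have hj2c : j2 ≤ c := by
            by_contra hgt2
            exact (hj2min c (by omega) (by omega)) hccl
          have hNCj2 : cnt s ']' (j2+1) = cnt s ']' (p+1) + 1 :=
            cnt_next s ']' hj2occ hj2ge hj2min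
          have hcast1 : ((p:Int) + 1) = ((p+1 : Nat) : Int) := by push_cast; ring
          have hcast2 : ((u:Int) + 1) = ((u+1 : Nat) : Int) := by push_cast; ring
          have hnext :
              ((PySem.Chars.findFrom s ['['] ((u:Int) + 1) none) = -1 ∧
                cnt s '[' s.length ≤ cnt s '[' (i+1) + (t+1)) ∨
              (∃ u2 : Nat, (PySem.Chars.findFrom s ['['] ((u:Int) + 1) none) = (u2:Int) ∧ i < u2 ∧
                s[u2]? = some '[' ∧ cnt s '[' (u2+1) = cnt s '[' (i+1) + (t+1) + 1) := by
            rw [hcast2]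
            rcases findFrom_char s '[' (u+1) (by omega) with
              ⟨u2, hu2eq, hu2ge, hu2lt, hu2occ, hu2min⟩ | ⟨huneg, hunone⟩
            · right
              refine ⟨u2, hu2eq, by omega, hu2occ, ?_⟩
              have := cnt_next s '[' hu2occ hu2ge hu2min
              omega
            · left
              refine ⟨huneg, ?_⟩
              have := cnt_congr s '[' (show u+1 ≤ s.length by omega) hunone
              omega
          simp only [aScanLoop]
          rw [if_pos ⟨by
              intro hne
              have : (0:Int) ≤ (u:Int) := Int.natCast_nonneg u
              omega,
            by rw [hself]; exact_mod_cast hcond⟩]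
          rw [hcast1, hj2eq]
          rw [if_neg (by
            intro hne
            have : (0:Int) ≤ (j2:Int) := Int.natCast_nonneg j2
            omega)]
          exact ih j2 _ (t+1) (by omega) hj2occ hj2c (by omega) hnext
        · exfalso
          have : cnt s ']' (c+1) = cnt s ']' (p+1) := by
            apply cnt_congr s ']' (show p+1 ≤ c+1 by omega)
            intro j' hj1 hj2
            exact hnone j' hj1 (by omega)
          omega
      · have hp : p = c := by
          by_contra hne
          have hplt : p < c := lt_of_le_of_ne hple hne
          have h2 := F2 (p+1) (by
            have hip : i < p := by
              by_contra hip'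
              have : p ≤ i := by omega
              have := cnt_mono s ']' (show p+1 ≤ i+1 by omega)
              omega
            omega) (by omega)
          have hpu : p < u := by
            rcases Nat.lt_or_ge p u with h | h
            · exact h
            · have hpe : u = p := by omega
              subst hpe
              rw [hpc] at hu
              exact absurd (Option.some_inj.mp hu) (by decide)
          have hstep : cnt s '[' (u+1) = cnt s '[' u + 1 := by
            rw [cnt_succ s '[' u hun, if_pos hu]
          have hm : cnt s '[' (p+1) ≤ cnt s '[' u := cnt_mono s '[' (by omega)
          omega
        subst hp
        simp only [aScanLoop]
        rw [if_neg (by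
          rintro ⟨_, hlt⟩
          rw [hself] at hlt
          exact hcond (by exact_mod_cast hlt))]

theorem aScan_start (s : List Char) (i : Nat) (hopen : s[i]? = some '[')
    (hc : mAt s i = some (clOf s i)) :
    PySem.Chars.findFrom s [']'] (↑i) none ≠ -1 ∧
    aScanLoop s (s.length + 1) (PySem.Chars.findFrom s [']'] (↑i) none)
      (PySem.Chars.findFrom s ['['] ((↑i : Int) + 1) none) = some (↑(clOf s i)) := by
  obtain ⟨hic, hcn, hccl, F1, F2⟩ := mAt_spec s i (clOf s i) hc
  set c := clOf s i with hcdef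
  have hin : i < s.length := by omega
  rcases findFrom_char s ']' i (by omega) with ⟨j0, hj0eq, hj0ge, hj0lt, hj0occ, hj0min⟩ | ⟨hneg, hnone⟩
  · have hj0c : j0 ≤ c := by
      by_contra hgt
      exact (hj0min c (by omega) (by omega)) hccl
    have hij0 : i < j0 := by
      rcases Nat.lt_or_ge i j0 with h | h
      · exact h
      · have : j0 = i := by omega
        subst this
        rw [hopen] at hj0occ
        exact absurd (Option.some_inj.mp hj0occ) (by decide)
    have hNCj0 : cnt s ']' (j0+1) = cnt s ']' (i+1) + 1 := by
      apply cnt_next s ']' hj0occ (by omega)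
      intro j' h1 h2
      exact hj0min j' (by omega) h2
    have hcast : ((i:Int) + 1) = ((i+1 : Nat) : Int) := by push_cast; ring
    have hne : PySem.Chars.findFrom s [']'] (↑i) none ≠ -1 := by
      rw [hj0eq]
      have : (0:Int) ≤ (j0:Int) := Int.natCast_nonneg j0
      omega
    refine ⟨hne, ?_⟩
    rw [hj0eq, hcast]
    have hnio :
        ((PySem.Chars.findFrom s ['['] ((i+1 : Nat) : Int) none) = -1 ∧
          cnt s '[' s.length ≤ cnt s '[' (i+1) + 0) ∨
        (∃ u : Nat, (PySem.Chars.findFrom s ['['] ((i+1 : Nat) : Int) none) = (u:Int) ∧ i < u ∧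
          s[u]? = some '[' ∧ cnt s '[' (u+1) = cnt s '[' (i+1) + 0 + 1) := by
      rcases findFrom_char s '[' (i+1) (by omega) with
        ⟨u0, hu0eq, hu0ge, hu0lt, hu0occ, hu0min⟩ | ⟨huneg, hunone⟩
      · right
        refine ⟨u0, hu0eq, by omega, hu0occ, ?_⟩
        have := cnt_next s '[' hu0occ hu0ge hu0min
        omega
      · left
        refine ⟨huneg, ?_⟩
        have := cnt_congr s '[' (show i+1 ≤ s.length by omega) hunone
        omega
    exact aScanLoop_inv s i c hccl hcn F1 F2 (s.length + 1) j0 _ 0 (by omega) hj0occ hj0c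
      (by omega) hnio
  · exact absurd (hnone c (by omega) hcn) (by simp [hccl])

-- ---------- phase 1, A side: the bracket list ----------

theorem aBrackets_go (s : List Char)
    (hall : ∀ o, o < s.length → s[o]? = some '[' → mAt s o = some (clOf s o)) :
    ∀ (l : List Char) (k : Nat) (bs : List (Int × Int)), l = s.drop k →
    (PySem.List.enumerate l (↑k)).foldl (aStep1 s) (some bs)
      = some (bs ++ (oGo l k).map (fun (o : Nat) => ((o : Int), (clOf s o : Int))))
  | [], k, bs, hl => by simp [PySem.List.enumerate, oGo]
  | ch :: t, k, bs, hl => by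
    have hk : k < s.length := by
      have := congrArg List.length hl
      simp at this
      omega
    have hsk : s[k]? = some ch := by
      have h0 : (s.drop k)[0]? = s[k + 0]? := List.getElem?_drop
      rw [← hl] at h0
      simpa using h0.symm
    have ht : t = s.drop (k+1) := by
      rw [List.drop_eq_getElem_cons hk] at hl
      exact (List.cons.injEq _ _ _ _).mp hl |>.2
    have henum : PySem.List.enumerate (ch :: t) (↑k) = ((↑k : Int), ch) :: PySem.List.enumerate t ((↑k : Int) + 1) := rfl
    have hcast : ((k:Int) + 1) = ((k+1 : Nat) : Int) := by push_cast; ring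
    rw [henum, List.foldl_cons, hcast]
    by_cases hch : ch = '['
    · subst hch
      have hmAt := hall k hk hsk
      obtain ⟨hne, hloop⟩ := aScan_start s k hsk hmAt
      have hstep : aStep1 s (some bs) ((↑k : Int), '[') =
          some (bs ++ [((k:Int), (clOf s k : Int))]) := by
        show (if ('[' : Char) = '[' then
            if PySem.Chars.findFrom s [']'] ((k:Int)) none = -1 then none
            else
              match aScanLoop s (s.length + 1) (PySem.Chars.findFrom s [']'] ((k:Int)) none)
                  (PySem.Chars.findFrom s ['['] ((k:Int) + 1) none) with
              | none => none
              | some c => some (bs ++ [((k:Int), c)])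
          else some bs) = some (bs ++ [((k:Int), (clOf s k : Int))])
        rw [if_pos rfl, if_neg hne, hloop]
      rw [hstep, aBrackets_go s hall t (k+1) _ ht]
      simp [oGo, List.append_assoc]
    · have hstep : aStep1 s (some bs) ((↑k : Int), ch) = some bs := by
        simp [aStep1, hch]
      rw [hstep, aBrackets_go s hall t (k+1) _ ht]
      simp [oGo, hch]

theorem aBrackets_eq (s : List Char)
    (hall : ∀ o, o < s.length → s[o]? = some '[' → mAt s o = some (clOf s o)) :
    aBrackets s = some ((opens s).map (fun (o : Nat) => ((o : Int), (clOf s o : Int)))) := by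
  have := aBrackets_go s hall s 0 [] (by simp)
  simpa [aBrackets, opens] using this

-- ---------- proof-side reference implementation: the two-dict grouping pass ----------
-- (used only to relate A's grouping to the scan of B; nothing below is part of either port)

def bStep1 (st : PySem.Dict Int Int × List Int) (ic : Int × Char) : PySem.Dict Int Int × List Int :=
  if ic.2 = '[' then (st.1, st.2 ++ [ic.1])
  else if ic.2 = ']' then
    match PySem.List.pop? st.2 with
    | some (o, rest) => (st.1.insert o ic.1, rest)
    | none => st
  else st

def bMatch (s : List Char) : PySem.Dict Int Int :=
  ((PySem.List.enumerate s).foldl bStep1 (⟨[]⟩, [])).1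

def bRot (s : List Char) (o c : Int) : List Char :=
  PySem.Chars.slice s (some (PySem.Chars.findFrom s ['R','o','t'] o (some c) + 3))
                     (some (PySem.Chars.findFrom s ['c','o','r','r','i','d','o','r'] o (some c)))

def bStep2 (s : List Char) (m : PySem.Dict Int Int)
    (st : PySem.Dict Int (List (List Char)) × PySem.Dict Int (List (List Char))) (o : Int) :
    PySem.Dict Int (List (List Char)) × PySem.Dict Int (List (List Char)) :=
  let c := m.getD o 0
  let rot := bRot s o c
  let acc := (st.1.getD c []) ++ [rot]
  let pending := st.1.erase c
  match m.get? (c + 1) with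
  | some nxt => (pending.insert nxt acc, st.2)
  | none => (pending, st.2.insert c acc)

def bGroups (s : List Char) (m : PySem.Dict Int Int) :
    PySem.Dict Int (List (List Char)) × PySem.Dict Int (List (List Char)) :=
  (PySem.List.sorted m.keys (fun x => x) false).foldl (bStep2 s m) (⟨[]⟩, ⟨[]⟩)

def bStep3 (s : List Char) (final : PySem.Dict Int (List (List Char))) (st : List (List Char) × Int) (c : Int) :
    List (List Char) × Int :=
  let ins := PySem.Chars.join [] (PySem.List.sorted (PySem.Set.ofList (final.getD c [])) (fun x => x) false)
             ++ ['i','n','t','e','r','s','e','c','t','i','o','n','!','(','2','5',')']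
  (st.1 ++ [PySem.Chars.slice s (some st.2) (some (c + 1)), ins], c + 1)

def bSplice (s : List Char) (final : PySem.Dict Int (List (List Char))) : List Char :=
  let r := (PySem.List.sorted final.keys (fun x => x) false).foldl (bStep3 s final) ([], (0:Int))
  PySem.Chars.join [] (r.1 ++ [PySem.Chars.slice s (some r.2) none])

-- ---------- the stack matcher reference: invariants ----------

def bInv (s : List Char) (st : PySem.Dict Int Int × List Int) : Prop :=
  (∀ p, p ∈ st.1.items ↔ ∃ o : Nat, o < s.length ∧ s[o]? = some '[' ∧
      ((o:Int) ∉ st.2) ∧ p = ((o:Int), (clOf s o : Int)) ∧ (mAt s o).isSome) ∧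
  st.1.keys.Nodup ∧ (st.1.items.map (fun p => p.2)).Nodup ∧
  (∀ o : Nat, o < s.length → s[o]? = some '[' → ((o:Int) ∈ st.2) ∨ ((o:Int) ∈ st.1.keys))

theorem bMatch_go (s : List Char) :
    ∀ (l : List Char) (k : Nat) (d : PySem.Dict Int Int) (js : List Nat),
      l = s.drop k →
      js.Pairwise (· < ·) →
      (∀ idx (h : idx < js.length), js[idx] < k ∧ s[js[idx]]? = some '[' ∧
          mAt s js[idx] = mclose (s.drop k) k (js.length - 1 - idx)) →
      (∀ p, p ∈ d.items ↔ ∃ o : Nat, o < k ∧ s[o]? = some '[' ∧ o ∉ js ∧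
          p = ((o:Int), (clOf s o : Int)) ∧ (mAt s o).isSome) →
      d.keys.Nodup →
      (∀ p ∈ d.items, ∃ cc : Nat, p.2 = (cc:Int) ∧ cc < k) →
      (d.items.map (fun p => p.2)).Nodup →
      (∀ o : Nat, o < k → s[o]? = some '[' → o ∈ js ∨ ((o:Int) ∈ d.keys)) →
      bInv s ((PySem.List.enumerate l (↑k)).foldl bStep1 (d, js.map (fun (u : Nat) => (u : Int))))
  | [], k, d, js, hl, hpw, hstack, hdict, hnd1, hbnd, hnd2, hcompl => by
    have hlen : s.length ≤ k := by
      have := congrArg List.length hl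
      simp at this
      omega
    refine ⟨?_, hnd1, hnd2, ?_⟩
    · intro p
      show p ∈ d.items ↔ ∃ o : Nat, o < s.length ∧ s[o]? = some '[' ∧
          ((o:Int) ∉ js.map (fun (u : Nat) => (u : Int))) ∧
          p = ((o:Int), (clOf s o : Int)) ∧ (mAt s o).isSome
      rw [hdict p]
      constructor
      · rintro ⟨o, ho1, ho2, ho3, ho4, ho5⟩
        refine ⟨o, occ_lt s ho2, ho2, ?_, ho4, ho5⟩
        intro hmem
        obtain ⟨u, hu1, hu2⟩ := List.mem_map.mp hmem
        exact ho3 (by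
          have : u = o := by exact_mod_cast hu2
          exact this ▸ hu1)
      · rintro ⟨o, ho1, ho2, ho3, ho4, ho5⟩
        refine ⟨o, by omega, ho2, ?_, ho4, ho5⟩
        intro hmem
        exact ho3 (List.mem_map.mpr ⟨o, hmem, rfl⟩)
    · intro o ho1 ho2
      show ((o:Int) ∈ js.map (fun (u : Nat) => (u : Int))) ∨ ((o:Int) ∈ d.keys)
      rcases hcompl o (by omega) ho2 with h | h
      · exact Or.inl (List.mem_map.mpr ⟨o, h, rfl⟩)
      · exact Or.inr h
  | ch :: t, k, d, js, hl, hpw, hstack, hdict, hnd1, hbnd, hnd2, hcompl => by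
    have hk : k < s.length := by
      have := congrArg List.length hl
      simp at this
      omega
    have hsk : s[k]? = some ch := by
      have h0 : (s.drop k)[0]? = s[k + 0]? := List.getElem?_drop
      rw [← hl] at h0
      simpa using h0.symm
    have ht : t = s.drop (k+1) := by
      rw [List.drop_eq_getElem_cons hk] at hl
      exact (List.cons.injEq _ _ _ _).mp hl |>.2
    have hjslt : ∀ u ∈ js, u < k := by
      intro u hu
      obtain ⟨idx, hidx, rfl⟩ := List.mem_iff_getElem.mp hu
      exact (hstack idx hidx).1
    have henum : PySem.List.enumerate (ch :: t) (↑k) =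
        ((↑k : Int), ch) :: PySem.List.enumerate t ((↑k : Int) + 1) := rfl
    have hcast : ((k:Int) + 1) = ((k+1 : Nat) : Int) := by push_cast; ring
    rw [henum, List.foldl_cons, hcast]
    by_cases hch : ch = '['
    · subst hch
      have hstep : bStep1 (d, js.map (fun (u : Nat) => (u : Int))) ((↑k : Int), '[') =
          (d, (js ++ [k]).map (fun (u : Nat) => (u : Int))) := by
        simp [bStep1]
      rw [hstep]
      apply bMatch_go s t (k+1) d (js ++ [k]) ht
      · rw [List.pairwise_append]
        exact ⟨hpw, List.pairwise_singleton _ _, by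
          intro a ha b hb
          rw [List.mem_singleton] at hb
          subst hb
          exact hjslt a ha⟩
      · intro idx hidx
        rw [List.length_append, List.length_singleton] at hidx
        by_cases hlt : idx < js.length
        · have he : (js ++ [k])[idx] = js[idx] := List.getElem_append_left hlt
          obtain ⟨h1, h2, h3⟩ := hstack idx hlt
          rw [he]
          refine ⟨by omega, h2, ?_⟩
          rw [h3]
          have hnc : s[k]? ≠ some ']' := by rw [hsk]; simp
          rw [mclose_step_other s k _ hk hnc, if_pos hsk]
          congr 1
          rw [List.length_append, List.length_singleton]
          omega
        · have hidx' : idx = js.length := by omega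
          subst hidx'
          have he : (js ++ [k])[js.length] = k := by
            rw [List.getElem_append_right (by omega)]
            simp
          rw [he]
          refine ⟨by omega, hsk, ?_⟩
          show mAt s k = mclose (s.drop (k+1)) (k+1) ((js ++ [k]).length - 1 - js.length)
          rw [List.length_append, List.length_singleton]
          have h0 : js.length + 1 - 1 - js.length = 0 := by omega
          rw [h0]
          rfl
      · intro p
        rw [hdict p]
        constructor
        · rintro ⟨o, ho1, ho2, ho3, ho4, ho5⟩
          refine ⟨o, by omega, ho2, ?_, ho4, ho5⟩
          rw [List.mem_append, List.mem_singleton]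
          rintro (h | h)
          · exact ho3 h
          · omega
        · rintro ⟨o, ho1, ho2, ho3, ho4, ho5⟩
          rw [List.mem_append, List.mem_singleton] at ho3
          push_neg at ho3
          exact ⟨o, by omega, ho2, ho3.1, ho4, ho5⟩
      · exact hnd1
      · intro p hp
        obtain ⟨cc, h1, h2⟩ := hbnd p hp
        exact ⟨cc, h1, by omega⟩
      · exact hnd2
      · intro o ho1 ho2
        by_cases ho : o = k
        · subst ho
          exact Or.inl (by simp)
        · rcases hcompl o (by omega) ho2 with h | h
          · exact Or.inl (by rw [List.mem_append]; exact Or.inl h)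
          · exact Or.inr h
    · by_cases hch2 : ch = ']'
      · subst hch2
        rcases List.eq_nil_or_concat js with rfl | ⟨js₀, jm, hjs⟩
        · have hstep : bStep1 (d, ([] : List Nat).map (fun (u : Nat) => (u : Int))) ((↑k : Int), ']') =
              (d, ([] : List Nat).map (fun (u : Nat) => (u : Int))) := by
            show (if (']' : Char) = '[' then (d, [] ++ [((k:Int))])
              else if (']' : Char) = ']' then
                match PySem.List.pop? ([] : List Int) with
                | some (o, rest) => (d.insert o ((k:Int)), rest)
                | none => (d, ([] : List Int))
              else (d, ([] : List Int))) = (d, ([] : List Int))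
            rw [if_neg (by decide), if_pos rfl]
            rfl
          rw [hstep]
          apply bMatch_go s t (k+1) d [] ht (by simp) (by intro idx h; simp at h)
          · intro p
            rw [hdict p]
            constructor
            · rintro ⟨o, ho1, ho2, ho3, ho4, ho5⟩
              exact ⟨o, by omega, ho2, ho3, ho4, ho5⟩
            · rintro ⟨o, ho1, ho2, ho3, ho4, ho5⟩
              have : o ≠ k := by
                intro he
                subst he
                rw [hsk] at ho2
                exact absurd (Option.some_inj.mp ho2) (by decide)
              exact ⟨o, by omega, ho2, ho3, ho4, ho5⟩
          · exact hnd1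
          · intro p hp
            obtain ⟨cc, h1, h2⟩ := hbnd p hp
            exact ⟨cc, h1, by omega⟩
          · exact hnd2
          · intro o ho1 ho2
            have : o ≠ k := by
              intro he
              subst he
              rw [hsk] at ho2
              exact absurd (Option.some_inj.mp ho2) (by decide)
            exact hcompl o (by omega) ho2
        · rw [List.concat_eq_append] at hjs
          subst hjs
          have hmap : (js₀ ++ [jm]).map (fun (u : Nat) => (u : Int)) =
              js₀.map (fun (u : Nat) => (u : Int)) ++ [(jm:Int)] := by simp
          have hstep : bStep1 (d, (js₀ ++ [jm]).map (fun (u : Nat) => (u : Int))) ((↑k : Int), ']') =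
              (d.insert (↑jm) (↑k), js₀.map (fun (u : Nat) => (u : Int))) := by
            show (if (']' : Char) = '[' then
                ((d, (js₀ ++ [jm]).map (fun (u : Nat) => (u : Int)) ++ [((k:Int))]))
              else if (']' : Char) = ']' then
                match PySem.List.pop? ((js₀ ++ [jm]).map (fun (u : Nat) => (u : Int))) with
                | some (o, rest) => (d.insert o ((k:Int)), rest)
                | none => (d, (js₀ ++ [jm]).map (fun (u : Nat) => (u : Int)))
              else (d, (js₀ ++ [jm]).map (fun (u : Nat) => (u : Int)))) = _
            rw [if_neg (by decide), if_pos rfl, hmap, pop?_concat]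
          rw [hstep]
          have hlen0 : js₀.length < (js₀ ++ [jm]).length := by simp
          have hjm := hstack js₀.length hlen0
          have hjmget : (js₀ ++ [jm])[js₀.length] = jm := by
            rw [List.getElem_append_right (by omega)]
            simp
          rw [hjmget] at hjm
          obtain ⟨hjmk, hjmocc, hjmcl⟩ := hjm
          have hdep0 : (js₀ ++ [jm]).length - 1 - js₀.length = 0 := by simp
          rw [hdep0] at hjmcl
          have hjmsome : mAt s jm = some k := by
            rw [hjmcl, mclose_step_close s k 0 hk hsk, if_pos rfl]
          have hcljm : clOf s jm = k := by
            unfold clOf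
            rw [hjmsome]
            rfl
          have hjmnotin : ((jm:Int)) ∉ d.keys := by
            intro hmem
            rw [dict_keys_eq] at hmem
            obtain ⟨p, hp, hp1⟩ := List.mem_map.mp hmem
            obtain ⟨o, ho1, ho2, ho3, ho4, ho5⟩ := (hdict p).mp hp
            rw [ho4] at hp1
            simp only at hp1
            have : o = jm := by exact_mod_cast hp1
            subst this
            exact ho3 (by simp)
          have hcontains : ¬ (d.contains (↑jm) = true) := by
            intro h
            exact hjmnotin ((dict_contains_iff d _).mp h)
          have hitems : (d.insert (↑jm) (↑k)).items = d.items ++ [((jm:Int), (k:Int))] := by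
            rw [dict_insert_eq, if_neg hcontains]
          have hpw0 : js₀.Pairwise (· < ·) := (List.pairwise_append.mp hpw).1
          have hjs0lt : ∀ u ∈ js₀, u < jm := by
            intro u hu
            exact (List.pairwise_append.mp hpw).2.2 u hu jm (by simp)
          have hkeysins : (d.insert (↑jm) (↑k)).keys = d.keys ++ [(jm:Int)] := by
            rw [dict_keys_insert, if_neg hjmnotin]
          apply bMatch_go s t (k+1) (d.insert (↑jm) (↑k)) js₀ ht hpw0
          · intro idx hidx
            have hidx' : idx < (js₀ ++ [jm]).length := by simp; omega
            have he : (js₀ ++ [jm])[idx] = js₀[idx] := List.getElem_append_left hidx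
            obtain ⟨h1, h2, h3⟩ := hstack idx hidx'
            rw [he] at h1 h2 h3
            refine ⟨by omega, h2, ?_⟩
            rw [h3]
            have hd : (js₀ ++ [jm]).length - 1 - idx = (js₀.length - 1 - idx) + 1 := by
              simp
              all_goals omega
            rw [hd, mclose_step_close s k _ hk hsk, if_neg (by omega)]
            all_goals (congr 1 <;> omega)
          · intro p
            rw [hitems, List.mem_append, List.mem_singleton, hdict p]
            constructor
            · rintro (⟨o, ho1, ho2, ho3, ho4, ho5⟩ | rfl)
              · rw [List.mem_append, List.mem_singleton] at ho3
                push_neg at ho3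
                exact ⟨o, by omega, ho2, ho3.1, ho4, ho5⟩
              · refine ⟨jm, by omega, hjmocc, ?_, by rw [hcljm], by rw [hjmsome]; rfl⟩
                intro hmem
                exact absurd (hjs0lt jm hmem) (by omega)
            · rintro ⟨o, ho1, ho2, ho3, ho4, ho5⟩
              by_cases ho : o = jm
              · subst ho
                right
                rw [ho4, hcljm]
              · left
                have : o ≠ k := by
                  intro he
                  subst he
                  rw [hsk] at ho2
                  exact absurd (Option.some_inj.mp ho2) (by decide)
                refine ⟨o, by omega, ho2, ?_, ho4, ho5⟩
                rw [List.mem_append, List.mem_singleton]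
                rintro (h | h)
                · exact ho3 h
                · exact ho h
          · rw [hkeysins]
            refine List.Nodup.append hnd1 (List.nodup_singleton _) ?_
            intro a ha hak
            rw [List.mem_singleton] at hak
            exact hjmnotin (hak ▸ ha)
          · intro p hp
            rw [hitems, List.mem_append, List.mem_singleton] at hp
            rcases hp with hp | rfl
            · obtain ⟨cc, h1, h2⟩ := hbnd p hp
              exact ⟨cc, h1, by omega⟩
            · exact ⟨k, rfl, by omega⟩
          · rw [hitems, List.map_append]
            refine List.Nodup.append hnd2 (by simp) ?_
            intro a ha hak
            simp at hak
            subst hak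
            obtain ⟨p, hp, hp2⟩ := List.mem_map.mp ha
            obtain ⟨cc, h1, h2⟩ := hbnd p hp
            rw [h1] at hp2
            have : cc = k := by exact_mod_cast hp2
            omega
          · intro o ho1 ho2
            have honk : o ≠ k := by
              intro he
              subst he
              rw [hsk] at ho2
              exact absurd (Option.some_inj.mp ho2) (by decide)
            rcases hcompl o (by omega) ho2 with h | h
            · rw [List.mem_append, List.mem_singleton] at h
              rcases h with h | h
              · exact Or.inl h
              · subst h
                exact Or.inr (by rw [hkeysins, List.mem_append]; exact Or.inr (by simp))
            · exact Or.inr (by rw [hkeysins, List.mem_append]; exact Or.inl h)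
      · have hstep : bStep1 (d, js.map (fun (u : Nat) => (u : Int))) ((↑k : Int), ch) =
            (d, js.map (fun (u : Nat) => (u : Int))) := by
          show (if ch = '[' then ((d, js.map (fun (u : Nat) => (u : Int)) ++ [((k:Int))]))
            else if ch = ']' then
              match PySem.List.pop? (js.map (fun (u : Nat) => (u : Int))) with
              | some (o, rest) => (d.insert o ((k:Int)), rest)
              | none => (d, js.map (fun (u : Nat) => (u : Int)))
            else (d, js.map (fun (u : Nat) => (u : Int)))) = _
          rw [if_neg hch, if_neg hch2]
        rw [hstep]
        apply bMatch_go s t (k+1) d js ht hpw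
        · intro idx hidx
          obtain ⟨h1, h2, h3⟩ := hstack idx hidx
          refine ⟨by omega, h2, ?_⟩
          rw [h3]
          have hnc : s[k]? ≠ some ']' := by rw [hsk]; simp [hch2]
          rw [mclose_step_other s k _ hk hnc, if_neg (by rw [hsk]; simp [hch])]
        · intro p
          rw [hdict p]
          constructor
          · rintro ⟨o, ho1, ho2, ho3, ho4, ho5⟩
            exact ⟨o, by omega, ho2, ho3, ho4, ho5⟩
          · rintro ⟨o, ho1, ho2, ho3, ho4, ho5⟩
            have : o ≠ k := by
              intro he
              subst he
              rw [hsk] at ho2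
              exact hch (Option.some_inj.mp ho2)
            exact ⟨o, by omega, ho2, ho3, ho4, ho5⟩
        · exact hnd1
        · intro p hp
          obtain ⟨cc, h1, h2⟩ := hbnd p hp
          exact ⟨cc, h1, by omega⟩
        · exact hnd2
        · intro o ho1 ho2
          have : o ≠ k := by
            intro he
            subst he
            rw [hsk] at ho2
            exact hch (Option.some_inj.mp ho2)
          exact hcompl o (by omega) ho2

theorem bMatch_len : ∀ (l : List Char) (k : Int) (d : PySem.Dict Int Int) (js : List Int),
    (((PySem.List.enumerate l k).foldl bStep1 (d, js)).2).length = l.foldl preCnt js.length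
  | [], _, _, _ => rfl
  | ch :: t, k, d, js => by
    rw [show PySem.List.enumerate (ch :: t) k = (k, ch) :: PySem.List.enumerate t (k+1) from rfl,
      List.foldl_cons, List.foldl_cons]
    by_cases h1 : ch = '['
    · subst h1
      have hstep : bStep1 (d, js) (k, '[') = (d, js ++ [k]) := by simp [bStep1]
      rw [hstep, bMatch_len t (k+1) d (js ++ [k])]
      simp [preCnt]
    · by_cases h2 : ch = ']'
      · subst h2
        rcases List.eq_nil_or_concat js with rfl | ⟨js₀, x, hjs⟩
        · have hstep : bStep1 (d, ([] : List Int)) (k, ']') = (d, ([] : List Int)) := by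
            show (if (']' : Char) = '[' then ((d, ([] : List Int) ++ [k]))
              else if (']' : Char) = ']' then
                match PySem.List.pop? ([] : List Int) with
                | some (o, rest) => (d.insert o k, rest)
                | none => (d, ([] : List Int))
              else (d, ([] : List Int))) = (d, ([] : List Int))
            rw [if_neg (by decide), if_pos rfl]
            rfl
          rw [hstep, bMatch_len t (k+1) d []]
          simp [preCnt]
        · rw [List.concat_eq_append] at hjs
          subst hjs
          have hstep : bStep1 (d, js₀ ++ [x]) (k, ']') = (d.insert x k, js₀) := by
            show (if (']' : Char) = '[' then ((d, (js₀ ++ [x]) ++ [k]))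
              else if (']' : Char) = ']' then
                match PySem.List.pop? (js₀ ++ [x]) with
                | some (o, rest) => (d.insert o k, rest)
                | none => (d, js₀ ++ [x])
              else (d, js₀ ++ [x])) = _
            rw [if_neg (by decide), if_pos rfl, pop?_concat]
          rw [hstep, bMatch_len t (k+1) (d.insert x k) js₀]
          simp [preCnt]
      · have hstep : bStep1 (d, js) (k, ch) = (d, js) := by simp [bStep1, h1, h2]
        rw [hstep, bMatch_len t (k+1) d js]
        simp [preCnt, h1, h2]

theorem bMatch_spec (s : List Char) (hpre : s.foldl preCnt 0 = 0) :
    (∀ p, p ∈ (bMatch s).items ↔ ∃ o : Nat, o < s.length ∧ s[o]? = some '[' ∧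
        p = ((o:Int), (clOf s o : Int)) ∧ (mAt s o).isSome) ∧
    (bMatch s).keys.Nodup ∧ ((bMatch s).items.map (fun p => p.2)).Nodup ∧
    (∀ o : Nat, o < s.length → s[o]? = some '[' → ((o:Int) ∈ (bMatch s).keys)) := by
  have hinv := bMatch_go s s 0 ⟨[]⟩ [] (by simp) (by simp) (by intro idx h; simp at h)
      (by
        intro p
        constructor
        · intro hp
          exact absurd hp (by simp [PySem.Dict.items])
        · rintro ⟨o, ho, _⟩
          exact absurd ho (by omega))
      (by simp [dict_keys_eq])
      (by intro p hp; exact absurd hp (by simp))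
      (by simp)
      (by intro o ho _; exact absurd ho (by omega))
  have hlen := bMatch_len s 0 ⟨[]⟩ []
  simp only [List.length_nil] at hlen
  rw [hpre] at hlen
  obtain ⟨hiff, hnd1, hnd2, hcompl⟩ := hinv
  have hstack : ((PySem.List.enumerate s ((0:Nat):Int)).foldl bStep1 (⟨[]⟩, (([]:List Nat).map (fun (u : Nat) => (u : Int))))).2 = [] := by
    apply List.eq_nil_of_length_eq_zero
    simpa using hlen
  have hb : (bMatch s).items = ((PySem.List.enumerate s ((0:Nat):Int)).foldl bStep1 (⟨[]⟩, (([]:List Nat).map (fun (u : Nat) => (u : Int))))).1.items := rfl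
  have hbk : (bMatch s).keys = ((PySem.List.enumerate s ((0:Nat):Int)).foldl bStep1 (⟨[]⟩, (([]:List Nat).map (fun (u : Nat) => (u : Int))))).1.keys := rfl
  refine ⟨?_, by rw [hbk]; exact hnd1, by rw [hb]; exact hnd2, ?_⟩
  · intro p
    rw [hb, hiff p]
    constructor
    · rintro ⟨o, h1, h2, h3, h4, h5⟩
      exact ⟨o, h1, h2, h4, h5⟩
    · rintro ⟨o, h1, h2, h4, h5⟩
      refine ⟨o, h1, h2, ?_, h4, h5⟩
      rw [hstack]
      simp
  · intro o h1 h2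
    rcases hcompl o h1 h2 with h | h
    · rw [hstack] at h
      simp at h
    · rw [hbk]
      exact h

theorem bMatch_get (s : List Char) (hpre : s.foldl preCnt 0 = 0) :
    ∀ o ∈ opens s, mAt s o = some (clOf s o) ∧ (bMatch s).get? (↑o) = some (↑(clOf s o)) := by
  obtain ⟨hiff, hnd1, hnd2, hcompl⟩ := bMatch_spec s hpre
  intro o ho
  obtain ⟨ho1, ho2⟩ := (mem_opens s o).mp ho
  have hkey : ((o:Int)) ∈ (bMatch s).keys := hcompl o ho1 ho2
  rw [dict_keys_eq] at hkey
  obtain ⟨p, hp, hp1⟩ := List.mem_map.mp hkey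
  obtain ⟨o', h1, h2, h4, h5⟩ := (hiff p).mp hp
  have hoo : o' = o := by
    rw [h4] at hp1
    simp only at hp1
    exact_mod_cast hp1
  subst hoo
  have hmAt : mAt s o' = some (clOf s o') := by
    rcases hm : mAt s o' with _ | v
    · rw [hm] at h5
      simp at h5
    · simp [clOf, hm]
  refine ⟨hmAt, ?_⟩
  rw [h4] at hp
  exact dict_get?_of_mem_items _ _ _ hnd1 hp

theorem bMatch_keys_inv (s : List Char) (hpre : s.foldl preCnt 0 = 0) :
    ∀ x : Int, ((bMatch s).get? x).isSome → ∃ o ∈ opens s, x = (o:Int) := by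
  obtain ⟨hiff, hnd1, hnd2, hcompl⟩ := bMatch_spec s hpre
  intro x hx
  have hkey : x ∈ (bMatch s).keys := (dict_mem_keys _ _).mpr hx
  rw [dict_keys_eq] at hkey
  obtain ⟨p, hp, hp1⟩ := List.mem_map.mp hkey
  obtain ⟨o, h1, h2, h4, h5⟩ := (hiff p).mp hp
  refine ⟨o, (mem_opens s o).mpr ⟨h1, h2⟩, ?_⟩
  rw [h4] at hp1
  exact hp1.symm

theorem bMatch_inj (s : List Char) (hpre : s.foldl preCnt 0 = 0) :
    ∀ o1 ∈ opens s, ∀ o2 ∈ opens s, clOf s o1 = clOf s o2 → o1 = o2 := by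
  obtain ⟨hiff, hnd1, hnd2, hcompl⟩ := bMatch_spec s hpre
  intro o1 ho1 o2 ho2 hcl
  obtain ⟨h11, h12⟩ := (mem_opens s o1).mp ho1
  obtain ⟨h21, h22⟩ := (mem_opens s o2).mp ho2
  have hm1 : ((o1:Int), (clOf s o1 : Int)) ∈ (bMatch s).items := by
    have hkey := hcompl o1 h11 h12
    rw [dict_keys_eq] at hkey
    obtain ⟨p, hp, hp1⟩ := List.mem_map.mp hkey
    obtain ⟨o', g1, g2, g4, g5⟩ := (hiff p).mp hp
    have : o' = o1 := by
      rw [g4] at hp1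
      simp only at hp1
      exact_mod_cast hp1
    subst this
    rw [← g4]
    exact hp
  have hm2 : ((o2:Int), (clOf s o2 : Int)) ∈ (bMatch s).items := by
    have hkey := hcompl o2 h21 h22
    rw [dict_keys_eq] at hkey
    obtain ⟨p, hp, hp1⟩ := List.mem_map.mp hkey
    obtain ⟨o', g1, g2, g4, g5⟩ := (hiff p).mp hp
    have : o' = o2 := by
      rw [g4] at hp1
      simp only at hp1
      exact_mod_cast hp1
    subst this
    rw [← g4]
    exact hp
  have heq := List.inj_on_of_nodup_map hnd2 hm1 hm2 (by simp [hcl])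
  have : (o1 : Int) = (o2 : Int) := congrArg Prod.fst heq
  exact_mod_cast this

theorem bMatch_sorted (s : List Char) (hpre : s.foldl preCnt 0 = 0) :
    PySem.List.sorted (bMatch s).keys (fun x => x) false =
      (opens s).map (fun (o : Nat) => (o : Int)) := by
  apply PySem.List.sorted_eq_of_perm_of_pairwise_lt
  · have hnd_m : ((opens s).map (fun (o : Nat) => (o : Int))).Nodup :=
      (opens_nodup s).map (fun a b hab => Nat.cast_injective hab)
    have hnd_k : (bMatch s).keys.Nodup := (bMatch_spec s hpre).2.1
    rw [List.perm_ext_iff_of_nodup hnd_m hnd_k]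
    intro a
    constructor
    · intro ha
      obtain ⟨o, ho, rfl⟩ := List.mem_map.mp ha
      have hg := (bMatch_get s hpre o ho).2
      rw [dict_mem_keys, hg]
      rfl
    · intro ha
      obtain ⟨o, ho, rfl⟩ := bMatch_keys_inv s hpre a ((dict_mem_keys _ _).mp ha)
      exact List.mem_map.mpr ⟨o, ho, rfl⟩
  · rw [List.pairwise_map]
    exact (opens_pairwise s).imp (fun h => by exact_mod_cast h)

-- ---------- phase 2: A's grouping equals the reference grouping ----------

def pairF (s : List Char) (o : Nat) : Int × Int := ((o:Int), (clOf s o : Int))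

theorem findNb_eq (s : List Char) (c : Nat) :
    ∀ (L : List Nat),
      aFindNb (c:Int) (L.map (pairF s)) =
        if (c+1) ∈ L then some (pairF s (c+1)) else none
  | [] => by simp [aFindNb]
  | u :: t => by
    by_cases hu : u = c+1
    · subst hu
      have hcond : (c:Int) = (pairF s (c+1)).1 - 1 := by
        simp only [pairF]
        push_cast
        ring
      simp only [List.map_cons, aFindNb]
      rw [if_pos hcond]
      all_goals rw [if_pos (show (c+1) ∈ (c+1) :: t from List.mem_cons_self)]
    · have hcond : ¬ ((c:Int) = (pairF s u).1 - 1) := by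
        simp only [pairF]
        intro h
        apply hu
        omega
      simp only [List.map_cons, aFindNb]
      rw [if_neg hcond, findNb_eq s c t]
      by_cases hm : (c+1) ∈ t
      · rw [if_pos hm, if_pos (List.mem_cons.mpr (Or.inr hm))]
      · rw [if_neg hm, if_neg (by
          rw [List.mem_cons]
          rintro (h | h)
          · exact hu h.symm
          · exact hm h)]

theorem phase2_go (s : List Char) (m : PySem.Dict Int Int)
    (hget : ∀ o ∈ opens s, m.get? (o:Int) = some ((clOf s o : Int)))
    (hkeys : ∀ x : Int, (m.get? x).isSome → ∃ o ∈ opens s, x = (o:Int))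
    (hinj : ∀ o1 ∈ opens s, ∀ o2 ∈ opens s, clOf s o1 = clOf s o2 → o1 = o2)
    (hcl : ∀ o ∈ opens s, o < clOf s o ∧ clOf s o < s.length) :
    ∀ (osuf : List Nat) (k : Nat) (ta pend fin : PySem.Dict Int (List (List Char))),
      opens s = (opens s).take k ++ osuf →
      ((opens s).take k).length = k →
      (∀ x, ta.get? x = ((fin.get? x).or (pend.get? x))) →
      (∀ x : Int, (pend.get? x).isSome → ∃ o ∈ osuf, x = (clOf s o : Int)) →
      (∀ x : Int, (fin.get? x).isSome → ∃ o ∈ (opens s).take k, x = (clOf s o : Int)) →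
      ta.keys.Nodup → pend.keys.Nodup → fin.keys.Nodup →
      (∀ x, ((PySem.List.enumerate (osuf.map (pairF s)) (k:Int)).foldl
              (aStep2 s ((opens s).map (pairF s))) ta).get? x
          = ((osuf.map (fun (u : Nat) => (u : Int))).foldl (bStep2 s m) (pend, fin)).2.get? x) ∧
      ((PySem.List.enumerate (osuf.map (pairF s)) (k:Int)).foldl
          (aStep2 s ((opens s).map (pairF s))) ta).keys.Nodup ∧
      ((osuf.map (fun (u : Nat) => (u : Int))).foldl (bStep2 s m) (pend, fin)).2.keys.Nodup ∧
      (∀ x : Int, (((osuf.map (fun (u : Nat) => (u : Int))).foldl (bStep2 s m) (pend, fin)).2.get? x).isSome →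
          ∃ o ∈ opens s, x = (clOf s o : Int))
  | [], k, ta, pend, fin, hsplit, hlen, hR1, hpend, hfin, hnta, hnpe, hnfi => by
    refine ⟨?_, hnta, hnfi, ?_⟩
    · intro x
      have hpnone : pend.get? x = none := by
        cases hp : pend.get? x with
        | none => rfl
        | some v =>
          obtain ⟨o, ho, _⟩ := hpend x (by rw [hp]; rfl)
          simp at ho
      show ta.get? x = fin.get? x
      rw [hR1 x, hpnone, Option.or_none]
    · intro x hx
      obtain ⟨o, ho, he⟩ := hfin x hx
      exact ⟨o, List.take_subset _ _ ho, he⟩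
  | o :: osuf', k, ta, pend, fin, hsplit, hlen, hR1, hpend, hfin, hnta, hnpe, hnfi => by
    have ho : o ∈ opens s := by
      rw [hsplit]
      exact List.mem_append.mpr (Or.inr List.mem_cons_self)
    obtain ⟨hoc, hcn⟩ := hcl o ho
    set c := clOf s o with hcdef
    have hpwsplit := opens_pairwise s
    rw [hsplit] at hpwsplit
    have hpa := List.pairwise_append.mp hpwsplit
    have hdone_lt : ∀ a ∈ (opens s).take k, a < o :=
      fun a ha => hpa.2.2 a ha o List.mem_cons_self
    have hsuf_gt : ∀ b ∈ osuf', o < b := fun b hb => (List.pairwise_cons.mp hpa.2.1).1 b hb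
    have hfin_c : fin.get? (c:Int) = none := by
      cases hf : fin.get? (c:Int) with
      | none => rfl
      | some v =>
        obtain ⟨o'', ho'', he⟩ := hfin (c:Int) (by rw [hf]; rfl)
        have hcc : clOf s o'' = c := by exact_mod_cast he.symm
        have : o'' = o := hinj o'' (List.take_subset _ _ ho'') o ho hcc
        subst this
        exact absurd (hdone_lt o'' ho'') (by omega)
    have hta_c : ta.get? (c:Int) = pend.get? (c:Int) := by
      rw [hR1, hfin_c, Option.none_or]
    have hdropk : ((opens s).map (pairF s)).drop k = (o :: osuf').map (pairF s) := by
      rw [← List.map_drop]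
      congr 1
      rw [hsplit]
      exact List.drop_left' hlen
    have hmemiff : ((c+1) ∈ (o :: osuf')) ↔ ((c+1) ∈ opens s) := by
      constructor
      · intro h
        rw [hsplit]
        exact List.mem_append.mpr (Or.inr h)
      · intro h
        rw [hsplit, List.mem_append] at h
        rcases h with h | h
        · exact absurd (hdone_lt _ h) (by omega)
        · exact h
    have henum : PySem.List.enumerate ((o :: osuf').map (pairF s)) (k:Int) =
        ((k:Int), pairF s o) :: PySem.List.enumerate (osuf'.map (pairF s)) ((k:Int) + 1) := rfl
    have hcast : ((k:Int) + 1) = ((k+1 : Nat) : Int) := by push_cast; ring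
    have hrotE : bRot s ((o:Int)) ((c:Int)) = aRot s ((o:Int), (c:Int)) := rfl
    have htake1 : (opens s).take (k+1) = (opens s).take k ++ [o] := by
      conv_lhs => rw [hsplit]
      rw [List.take_append]
      congr 1
      · exact List.take_of_length_le (by omega)
      · rw [hlen]
        simp
    have hsplit' : opens s = (opens s).take (k+1) ++ osuf' := by
      rw [htake1, List.append_assoc]
      exact hsplit
    have hlen' : ((opens s).take (k+1)).length = k + 1 := by
      rw [htake1]
      simp [hlen]
    have hgetD : m.getD ((o:Int)) 0 = (c:Int) := by
      rw [dict_getD_eq, hget o ho]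
      rfl
    have hcast2 : ((c:Int) + 1) = ((c+1 : Nat) : Int) := by push_cast; ring
    rw [henum, List.foldl_cons, hcast, List.map_cons, List.foldl_cons]
    by_cases hnbm : (c+1) ∈ opens s
    · set c2 := clOf s (c+1) with hc2def
      obtain ⟨hc2gt, hc2n⟩ := hcl (c+1) hnbm
      have hnxtB : m.get? ((c:Int) + 1) = some ((c2:Int)) := by
        rw [hcast2]
        exact hget (c+1) hnbm
      have hne_cn : ((c2:Int)) ≠ ((c:Int)) := by
        intro h
        have : c2 = c := by exact_mod_cast h
        omega
      have hfin_nxt : fin.get? ((c2:Int)) = none := by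
        cases hf : fin.get? ((c2:Int)) with
        | none => rfl
        | some v =>
          obtain ⟨o'', ho'', he⟩ := hfin ((c2:Int)) (by rw [hf]; rfl)
          have hcc : clOf s o'' = c2 := by exact_mod_cast he.symm
          have : o'' = c+1 := hinj o'' (List.take_subset _ _ ho'') (c+1) hnbm hcc
          subst this
          exact absurd (hdone_lt _ ho'') (by omega)
      have hc1suf : (c+1) ∈ osuf' := by
        have := hmemiff.mpr hnbm
        rcases List.mem_cons.mp this with h | h
        · omega
        · exact h
      have hstepA : aStep2 s ((opens s).map (pairF s)) ta ((k:Int), pairF s o) =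
          (match ta.get? ((c:Int)) with
           | none => ta.insert ((c2:Int)) [aRot s ((o:Int), (c:Int))]
           | some v => (ta.insert ((c2:Int)) (v ++ [aRot s ((o:Int), (c:Int))])).erase ((c:Int))) := by
        show aStep2 s ((opens s).map (pairF s)) ta ((k:Int), ((o:Int), (c:Int))) = _
        simp only [aStep2, PySem.List.slice_from_natCast, hdropk, findNb_eq s c (o :: osuf'),
          if_pos (hmemiff.mpr hnbm)]
        rfl
      have hstepB : bStep2 s m (pend, fin) ((o:Int)) =
          ((pend.erase ((c:Int))).insert ((c2:Int))
            ((pend.getD ((c:Int)) []) ++ [aRot s ((o:Int), (c:Int))]), fin) := by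
        simp only [bStep2, hgetD, hnxtB, hrotE]
      rw [hstepA, hstepB]
      cases hpc : pend.get? ((c:Int)) with
      | none =>
        rw [hta_c, hpc]
        have hgd : pend.getD ((c:Int)) [] = [] := by rw [dict_getD_eq, hpc]; rfl
        rw [hgd]
        apply phase2_go s m hget hkeys hinj hcl osuf' (k+1) _ _ fin hsplit' hlen'
        · intro x
          rw [dict_get?_insert, dict_get?_insert, dict_get?_erase]
          by_cases hx2 : x = ((c2:Int))
          · rw [if_pos hx2, if_pos hx2, hx2, hfin_nxt]
            rfl
          · rw [if_neg hx2, if_neg hx2]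
            by_cases hxc : x = ((c:Int))
            · rw [if_pos hxc, hxc, hta_c, hpc, hfin_c]
              rfl
            · rw [if_neg hxc, hR1 x]
        · intro x hx
          rw [dict_get?_insert] at hx
          by_cases hx2 : x = ((c2:Int))
          · exact ⟨c+1, hc1suf, by rw [hx2, hc2def]⟩
          · rw [if_neg hx2, dict_get?_erase] at hx
            by_cases hxc : x = ((c:Int))
            · rw [if_pos hxc] at hx
              simp at hx
            · rw [if_neg hxc] at hx
              obtain ⟨o'', ho'', he⟩ := hpend x hx
              rcases List.mem_cons.mp ho'' with h | h
              · subst h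
                exact absurd he (by rw [← hcdef]; exact hxc)
              · exact ⟨o'', h, he⟩
        · intro x hx
          obtain ⟨o'', ho'', he⟩ := hfin x hx
          exact ⟨o'', by rw [htake1]; exact List.mem_append.mpr (Or.inl ho''), he⟩
        · exact dict_keys_nodup_insert _ _ _ hnta
        · exact dict_keys_nodup_insert _ _ _ (dict_keys_nodup_erase _ _ hnpe)
        · exact hnfi
      | some v =>
        rw [hta_c, hpc]
        have hgd : pend.getD ((c:Int)) [] = v := by rw [dict_getD_eq, hpc]; rfl
        rw [hgd]
        apply phase2_go s m hget hkeys hinj hcl osuf' (k+1) _ _ fin hsplit' hlen'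
        · intro x
          rw [dict_get?_erase, dict_get?_insert, dict_get?_insert, dict_get?_erase]
          by_cases hxc : x = ((c:Int))
          · subst hxc
            simp [hfin_c, (show ((c:Int)) ≠ ((c2:Int)) from fun hh => hne_cn hh.symm)]
          · by_cases hx2 : x = ((c2:Int))
            · subst hx2
              simp [hxc, hfin_nxt]
            · simp [hxc, hx2, hR1 x]
        · intro x hx
          rw [dict_get?_insert] at hx
          by_cases hx2 : x = ((c2:Int))
          · exact ⟨c+1, hc1suf, by rw [hx2, hc2def]⟩
          · rw [if_neg hx2, dict_get?_erase] at hx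
            by_cases hxc : x = ((c:Int))
            · rw [if_pos hxc] at hx
              simp at hx
            · rw [if_neg hxc] at hx
              obtain ⟨o'', ho'', he⟩ := hpend x hx
              rcases List.mem_cons.mp ho'' with h | h
              · subst h
                exact absurd he (by rw [← hcdef]; exact hxc)
              · exact ⟨o'', h, he⟩
        · intro x hx
          obtain ⟨o'', ho'', he⟩ := hfin x hx
          exact ⟨o'', by rw [htake1]; exact List.mem_append.mpr (Or.inl ho''), he⟩
        · exact dict_keys_nodup_erase _ _ (dict_keys_nodup_insert _ _ _ hnta)
        · exact dict_keys_nodup_insert _ _ _ (dict_keys_nodup_erase _ _ hnpe)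
        · exact hnfi
    · have hnxtB : m.get? ((c:Int) + 1) = none := by
        cases hg : m.get? ((c:Int) + 1) with
        | none => rfl
        | some v =>
          obtain ⟨o'', ho'', he⟩ := hkeys ((c:Int) + 1) (by rw [hg]; rfl)
          have : o'' = c + 1 := by omega
          subst this
          exact absurd ho'' hnbm
      have hstepA : aStep2 s ((opens s).map (pairF s)) ta ((k:Int), pairF s o) =
          (match ta.get? ((c:Int)) with
           | none => ta.insert ((c:Int)) [aRot s ((o:Int), (c:Int))]
           | some v => ta.insert ((c:Int)) (v ++ [aRot s ((o:Int), (c:Int))])) := by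
        show aStep2 s ((opens s).map (pairF s)) ta ((k:Int), ((o:Int), (c:Int))) = _
        simp only [aStep2, PySem.List.slice_from_natCast, hdropk, findNb_eq s c (o :: osuf'),
          if_neg (fun h => hnbm (hmemiff.mp h))]
      have hstepB : bStep2 s m (pend, fin) ((o:Int)) =
          (pend.erase ((c:Int)),
           fin.insert ((c:Int)) ((pend.getD ((c:Int)) []) ++ [aRot s ((o:Int), (c:Int))])) := by
        simp only [bStep2, hgetD, hnxtB, hrotE]
      rw [hstepA, hstepB]
      cases hpc : pend.get? ((c:Int)) with
      | none =>
        rw [hta_c, hpc]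
        have hgd : pend.getD ((c:Int)) [] = [] := by rw [dict_getD_eq, hpc]; rfl
        rw [hgd]
        apply phase2_go s m hget hkeys hinj hcl osuf' (k+1) _ _ _ hsplit' hlen'
        · intro x
          rw [dict_get?_insert, dict_get?_insert, dict_get?_erase]
          by_cases hxc : x = ((c:Int))
          · rw [if_pos hxc, if_pos hxc]
            rfl
          · rw [if_neg hxc, if_neg hxc, if_neg hxc, hR1 x]
        · intro x hx
          rw [dict_get?_erase] at hx
          by_cases hxc : x = ((c:Int))
          · rw [if_pos hxc] at hx
            simp at hx
          · rw [if_neg hxc] at hx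
            obtain ⟨o'', ho'', he⟩ := hpend x hx
            rcases List.mem_cons.mp ho'' with h | h
            · subst h
              exact absurd he (by rw [← hcdef]; exact hxc)
            · exact ⟨o'', h, he⟩
        · intro x hx
          rw [dict_get?_insert] at hx
          by_cases hxc : x = ((c:Int))
          · exact ⟨o, by rw [htake1]; exact List.mem_append.mpr (Or.inr (by simp)), by rw [hxc, hcdef]⟩
          · rw [if_neg hxc] at hx
            obtain ⟨o'', ho'', he⟩ := hfin x hx
            exact ⟨o'', by rw [htake1]; exact List.mem_append.mpr (Or.inl ho''), he⟩
        · exact dict_keys_nodup_insert _ _ _ hnta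
        · exact dict_keys_nodup_erase _ _ hnpe
        · exact dict_keys_nodup_insert _ _ _ hnfi
      | some v =>
        rw [hta_c, hpc]
        have hgd : pend.getD ((c:Int)) [] = v := by rw [dict_getD_eq, hpc]; rfl
        rw [hgd]
        apply phase2_go s m hget hkeys hinj hcl osuf' (k+1) _ _ _ hsplit' hlen'
        · intro x
          rw [dict_get?_insert, dict_get?_insert, dict_get?_erase]
          by_cases hxc : x = ((c:Int))
          · rw [if_pos hxc, if_pos hxc]
            rfl
          · rw [if_neg hxc, if_neg hxc, if_neg hxc, hR1 x]
        · intro x hx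
          rw [dict_get?_erase] at hx
          by_cases hxc : x = ((c:Int))
          · rw [if_pos hxc] at hx
            simp at hx
          · rw [if_neg hxc] at hx
            obtain ⟨o'', ho'', he⟩ := hpend x hx
            rcases List.mem_cons.mp ho'' with h | h
            · subst h
              exact absurd he (by rw [← hcdef]; exact hxc)
            · exact ⟨o'', h, he⟩
        · intro x hx
          rw [dict_get?_insert] at hx
          by_cases hxc : x = ((c:Int))
          · exact ⟨o, by rw [htake1]; exact List.mem_append.mpr (Or.inr (by simp)), by rw [hxc, hcdef]⟩
          · rw [if_neg hxc] at hx
            obtain ⟨o'', ho'', he⟩ := hfin x hx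
            exact ⟨o'', by rw [htake1]; exact List.mem_append.mpr (Or.inl ho''), he⟩
        · exact dict_keys_nodup_insert _ _ _ hnta
        · exact dict_keys_nodup_erase _ _ hnpe
        · exact dict_keys_nodup_insert _ _ _ hnfi

theorem phase2 (s : List Char) (hpre : s.foldl preCnt 0 = 0) :
    (∀ x, (aToAdd s ((opens s).map (pairF s))).get? x = (bGroups s (bMatch s)).2.get? x) ∧
    (aToAdd s ((opens s).map (pairF s))).keys.Nodup ∧
    (bGroups s (bMatch s)).2.keys.Nodup ∧
    (∀ x : Int, ((bGroups s (bMatch s)).2.get? x).isSome →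
        ∃ o ∈ opens s, x = (clOf s o : Int)) := by
  have hsorted := bMatch_sorted s hpre
  have hget : ∀ o ∈ opens s, (bMatch s).get? (o:Int) = some ((clOf s o : Int)) :=
    fun o ho => (bMatch_get s hpre o ho).2
  have hcl : ∀ o ∈ opens s, o < clOf s o ∧ clOf s o < s.length := by
    intro o ho
    have h1 := (bMatch_get s hpre o ho).1
    have h2 := mAt_spec s o (clOf s o) h1
    exact ⟨h2.1, h2.2.1⟩
  have hgo := phase2_go s (bMatch s) hget (bMatch_keys_inv s hpre) (bMatch_inj s hpre) hcl
      (opens s) 0 ⟨[]⟩ ⟨[]⟩ ⟨[]⟩ (by simp) (by simp)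
      (by intro x; rfl)
      (by intro x hx; rw [dict_empty_get?] at hx; simp at hx)
      (by intro x hx; rw [dict_empty_get?] at hx; simp at hx)
      (by simp [dict_keys_eq, PySem.Dict.items])
      (by simp [dict_keys_eq, PySem.Dict.items])
      (by simp [dict_keys_eq, PySem.Dict.items])
  have hA : aToAdd s ((opens s).map (pairF s)) =
      (PySem.List.enumerate ((opens s).map (pairF s)) ((0:Nat):Int)).foldl
        (aStep2 s ((opens s).map (pairF s))) ⟨[]⟩ := rfl
  have hB : bGroups s (bMatch s) =
      (((opens s).map (fun (u : Nat) => (u : Int))).foldl (bStep2 s (bMatch s)) (⟨[]⟩, ⟨[]⟩)) := by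
    unfold bGroups
    rw [hsorted]
  rw [hA, hB]
  exact hgo

-- ---------- phase 3: offset splicing equals piecewise rebuilding ----------

def stepA (g : Int → List Char) (st : List Char × Int) (i : Int) : List Char × Int :=
  (PySem.Chars.slice st.1 none (some (i + 1 + st.2)) ++ g i ++
     PySem.Chars.slice st.1 (some (i + 1 + st.2)) none,
   st.2 + ((g i).length : Int))

def stepB (s : List Char) (g : Int → List Char) (st : List (List Char) × Int) (c : Int) :
    List (List Char) × Int :=
  (st.1 ++ [PySem.Chars.slice s (some st.2) (some (c + 1)), g c], c + 1)

theorem phase3_go (s : List Char) (g : Int → List Char) :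
    ∀ (ks : List Int) (X : List (List Char)) (prev : Nat),
      ks.Pairwise (· < ·) →
      (∀ x ∈ ks, ∃ cc : Nat, x = (cc:Int) ∧ prev ≤ cc ∧ cc < s.length) →
      (ks.foldl (stepA g) (X.flatten ++ s.drop prev, (X.flatten.length : Int) - ((prev:Nat) : Int))).1
      = (ks.foldl (stepB s g) (X, ((prev:Nat):Int))).1.flatten
          ++ PySem.Chars.slice s (some ((ks.foldl (stepB s g) (X, ((prev:Nat):Int))).2)) none
  | [], X, prev, hpw, hmem => by
    simp only [List.foldl_nil]
    rw [PySem.Chars.slice_eq_listSlice, PySem.List.slice_from_natCast]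
  | k :: ks', X, prev, hpw, hmem => by
    obtain ⟨cc, rfl, hprev, hccn⟩ := hmem k List.mem_cons_self
    have hpw' : ks'.Pairwise (· < ·) := (List.pairwise_cons.mp hpw).2
    have hhead : ∀ x ∈ ks', ((cc:Int)) < x := (List.pairwise_cons.mp hpw).1
    set seg := (s.drop prev).take (cc + 1 - prev) with hsegdef
    set X' := X ++ [seg, g ((cc:Int))] with hX'def
    have hseglen : seg.length = cc + 1 - prev := by
      rw [hsegdef, List.length_take, List.length_drop]
      omega
    have hflat : X'.flatten = X.flatten ++ seg ++ g ((cc:Int)) := by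
      rw [hX'def]
      simp
    have harith : ((cc:Int)) + 1 + ((X.flatten.length : Int) - ((prev:Nat):Int)) =
        (((X.flatten.length + (cc + 1 - prev) : Nat)):Int) := by
      push_cast
      omega
    have hsliceA1 : PySem.Chars.slice (X.flatten ++ s.drop prev) none
        (some (((X.flatten.length + (cc + 1 - prev) : Nat)):Int)) = X.flatten ++ seg := by
      rw [PySem.Chars.slice_eq_listSlice, PySem.List.slice_to _ (Int.natCast_nonneg _)]
      rw [Int.toNat_natCast, List.take_append]
      congr 1
      · exact List.take_of_length_le (by omega)
      · rw [hsegdef]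
        congr 1
        omega
    have hsliceA2 : PySem.Chars.slice (X.flatten ++ s.drop prev)
        (some (((X.flatten.length + (cc + 1 - prev) : Nat)):Int)) none = s.drop (cc + 1) := by
      rw [PySem.Chars.slice_eq_listSlice, PySem.List.slice_from_natCast]
      rw [List.drop_append, List.drop_drop]
      rw [List.drop_eq_nil_of_le (by omega), List.nil_append]
      congr 1
      omega
    have hseg2 : PySem.Chars.slice s (some ((prev:Nat):Int)) (some ((cc:Int) + 1)) = seg := by
      rw [PySem.Chars.slice_eq_listSlice]
      have hc1 : ((cc:Int) + 1) = (((cc+1:Nat)):Int) := by push_cast; ring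
      rw [hc1, PySem.List.slice_toNat s (Int.natCast_nonneg prev) (Int.natCast_nonneg (cc+1))]
      rw [Int.toNat_natCast, Int.toNat_natCast, hsegdef]
    have hstA : stepA g (X.flatten ++ s.drop prev,
        (X.flatten.length : Int) - ((prev:Nat):Int)) ((cc:Int)) =
        (X'.flatten ++ s.drop (cc+1), (X'.flatten.length : Int) - (((cc+1:Nat)):Int)) := by
      simp only [stepA]
      rw [harith, hsliceA1, hsliceA2]
      have h1 : X.flatten ++ seg ++ g ((cc:Int)) ++ s.drop (cc+1) = X'.flatten ++ s.drop (cc+1) := by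
        rw [hflat]
      have h2 : (X.flatten.length : Int) - ((prev:Nat):Int) + (((g ((cc:Int))).length : Nat):Int) =
          (X'.flatten.length : Int) - (((cc+1:Nat)):Int) := by
        have hl : X'.flatten.length = X.flatten.length + seg.length + (g ((cc:Int))).length := by
          rw [hflat]
          simp
          all_goals omega
        rw [hl]
        push_cast
        omega
      rw [← h1, ← h2]
    have hstB : stepB s g (X, ((prev:Nat):Int)) ((cc:Int)) = (X', (((cc+1:Nat)):Int)) := by
      simp only [stepB]
      rw [hseg2]
      have h2 : ((cc:Int)) + 1 = (((cc+1:Nat)):Int) := by push_cast; ring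
      rw [h2, hX'def]
    have hmem' : ∀ x ∈ ks', ∃ cc' : Nat, x = (cc':Int) ∧ cc + 1 ≤ cc' ∧ cc' < s.length := by
      intro x hx
      obtain ⟨cc', rfl, _, hn⟩ := hmem x (List.mem_cons.mpr (Or.inr hx))
      have := hhead _ hx
      exact ⟨cc', rfl, by omega, hn⟩
    simp only [List.foldl_cons]
    rw [hstA, hstB]
    exact phase3_go s g ks' X' (cc+1) hpw' hmem'

-- ---------- assembling A against the reference ----------

theorem main_eq (s : List Char) (hpre : s.foldl preCnt 0 = 0) :
    aInsert s (aToAdd s ((opens s).map (pairF s))) = bSplice s (bGroups s (bMatch s)).2 := by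
  obtain ⟨hR1, hnta, hnfi, hfinkeys⟩ := phase2 s hpre
  set ta := aToAdd s ((opens s).map (pairF s)) with hta
  set fin := (bGroups s (bMatch s)).2 with hfin
  have hclb : ∀ o ∈ opens s, clOf s o < s.length := by
    intro o ho
    have h1 := (bMatch_get s hpre o ho).1
    exact (mAt_spec s o (clOf s o) h1).2.1
  have hkeq : PySem.List.sorted ta.keys (fun x => x) false =
      PySem.List.sorted fin.keys (fun x => x) false := by
    apply PySem.List.sorted_eq_sorted_of_perm
    · exact fun a b h => h
    · rw [List.perm_ext_iff_of_nodup hnta hnfi]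
      intro a
      rw [dict_mem_keys, dict_mem_keys, hR1 a]
  set ks := PySem.List.sorted fin.keys (fun x => x) false with hks
  have hksnd : ks.Nodup := (PySem.List.sorted_perm fin.keys (fun x => x) false).symm.nodup hnfi
  have hkspw : ks.Pairwise (· < ·) := by
    have h1 := PySem.List.sorted_pairwise fin.keys (fun x => x)
    have h2 : ks.Pairwise (· ≠ ·) := hksnd
    exact (h1.and h2).imp (fun h => lt_of_le_of_ne h.1 h.2)
  have hksmem : ∀ x ∈ ks, ∃ cc : Nat, x = (cc:Int) ∧ 0 ≤ cc ∧ cc < s.length := by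
    intro x hx
    have hxk : x ∈ fin.keys := (PySem.List.sorted_perm fin.keys (fun x => x) false).subset hx
    obtain ⟨o, ho, rfl⟩ := hfinkeys x ((dict_mem_keys fin x).mp hxk)
    exact ⟨clOf s o, rfl, by omega, hclb o ho⟩
  set g : Int → List Char := fun i =>
    PySem.Chars.join [] (PySem.List.sorted (PySem.Set.ofList (ta.getD i [])) (fun x => x) false)
      ++ ['i','n','t','e','r','s','e','c','t','i','o','n','!','(','2','5',')'] with hg
  have hgd : ∀ x, fin.getD x [] = ta.getD x [] := by
    intro x
    rw [dict_getD_eq, dict_getD_eq, hR1 x]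
  have hAbody : aStep3 ta = stepA g := by
    funext st i
    rfl
  have hBbody : bStep3 s fin = stepB s g := by
    funext st c
    simp only [bStep3, stepB, hg, hgd]
  have hinit : ((s : List Char), (0:Int)) =
      ((([] : List (List Char)).flatten ++ s.drop 0),
        ((([] : List (List Char)).flatten.length : Int) - (((0:Nat)):Int))) := by
    simp
  show (( PySem.List.sorted ta.keys (fun x => x) false).foldl (aStep3 ta) (s, (0:Int))).1 = _
  rw [hkeq, hAbody, hinit]
  have hmain := phase3_go s g ks ([] : List (List Char)) 0 hkspw (by
    intro x hx
    obtain ⟨cc, rfl, _, hn⟩ := hksmem x hx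
    exact ⟨cc, rfl, by omega, hn⟩)
  rw [hmain]
  show _ = PySem.Chars.join [] ((ks.foldl (bStep3 s fin) ([], (0:Int))).1 ++
      [PySem.Chars.slice s (some ((ks.foldl (bStep3 s fin) ([], (0:Int))).2)) none])
  rw [hBbody, join_nil_eq_flatten]
  rw [List.flatten_append]
  simp

-- ---------- the chain word of a close position ----------

theorem find?_unique {alpha : Type} (p : alpha → Bool) :
    ∀ (l : List alpha) (a : alpha), a ∈ l → p a = true → (∀ b ∈ l, p b = true → b = a) →
      l.find? p = some a
  | [], a, ha, _, _ => absurd ha (by simp)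
  | x :: t, a, ha, hpa, huniq => by
    by_cases hx : p x = true
    · rw [List.find?_cons_of_pos hx, huniq x List.mem_cons_self hx]
    · rw [List.find?_cons_of_neg hx]
      rcases List.mem_cons.mp ha with rfl | hmem
      · exact absurd hpa hx
      · exact find?_unique p t a hmem hpa (fun b hb => huniq b (List.mem_cons.mpr (Or.inr hb)))

def chainF (s : List Char) : Nat → List (List Char)
  | c =>
    match h : (opens s).find? (fun o => decide (o < c ∧ clOf s o = c)) with
    | some o => chainF s (o - 1) ++ [aRot s ((o : Int), (c : Int))]
    | none => []
  termination_by c => c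
  decreasing_by
    have hp := List.find?_some h
    simp at hp
    omega

theorem chainF_eq (s : List Char) (c o : Nat) (ho : o ∈ opens s) (h1 : o < c)
    (h2 : clOf s o = c)
    (huniq : ∀ o' ∈ opens s, o' < c → clOf s o' = c → o' = o) :
    chainF s c = chainF s (o - 1) ++ [aRot s ((o : Int), (c : Int))] := by
  rw [chainF]
  rw [find?_unique (fun o => decide (o < c ∧ clOf s o = c)) (opens s) o ho
    (by simp [h1, h2]) (by intro b hb hpb; simp at hpb; exact huniq b hb hpb.1 hpb.2)]

theorem chainF_nil (s : List Char) (c : Nat)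
    (h : ∀ o ∈ opens s, ¬ (o < c ∧ clOf s o = c)) : chainF s c = [] := by
  rw [chainF]
  rw [List.find?_eq_none.mpr (by intro o ho; simpa using h o ho)]

-- ---------- the reference grouping's final dict, characterized ----------

theorem finChar_go (s : List Char) (m : PySem.Dict Int Int)
    (hget : ∀ o ∈ opens s, m.get? (o:Int) = some ((clOf s o : Int)))
    (hkeys : ∀ x : Int, (m.get? x).isSome → ∃ o ∈ opens s, x = (o:Int))
    (hinj : ∀ o1 ∈ opens s, ∀ o2 ∈ opens s, clOf s o1 = clOf s o2 → o1 = o2)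
    (hcl : ∀ o ∈ opens s, o < clOf s o ∧ clOf s o < s.length) :
    ∀ (osuf : List Nat) (k : Nat) (pend fin : PySem.Dict Int (List (List Char))),
      opens s = (opens s).take k ++ osuf →
      ((opens s).take k).length = k →
      (∀ x v, pend.get? x = some v ↔ ∃ o2 ∈ osuf, x = (clOf s o2 : Int) ∧
          (∃ o' ∈ (opens s).take k, clOf s o' + 1 = o2) ∧ v = chainF s (o2 - 1)) →
      (∀ x v, fin.get? x = some v ↔ ∃ o ∈ (opens s).take k, x = (clOf s o : Int) ∧
          (clOf s o + 1) ∉ opens s ∧ v = chainF s (clOf s o)) →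
      (∀ x v, ((osuf.map (fun (u : Nat) => (u : Int))).foldl (bStep2 s m) (pend, fin)).2.get? x = some v ↔
          ∃ o ∈ opens s, x = (clOf s o : Int) ∧ (clOf s o + 1) ∉ opens s ∧ v = chainF s (clOf s o))
  | [], k, pend, fin, hsplit, hlen, hIP, hIF => by
    intro x v
    simp only [List.map_nil, List.foldl_nil]
    rw [hIF x v]
    rw [List.append_nil] at hsplit
    rw [← hsplit]
  | o :: osuf', k, pend, fin, hsplit, hlen, hIP, hIF => by
    have ho : o ∈ opens s := by
      rw [hsplit]
      exact List.mem_append.mpr (Or.inr List.mem_cons_self)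
    obtain ⟨hoc, hcn⟩ := hcl o ho
    set c := clOf s o with hcdef
    have hnodup := opens_nodup s
    rw [hsplit] at hnodup
    have hpwsplit := opens_pairwise s
    rw [hsplit] at hpwsplit
    have hpa := List.pairwise_append.mp hpwsplit
    have hdone_lt : ∀ a ∈ (opens s).take k, a < o :=
      fun a ha => hpa.2.2 a ha o List.mem_cons_self
    have hsuf_gt : ∀ b ∈ osuf', o < b := fun b hb => (List.pairwise_cons.mp hpa.2.1).1 b hb
    have honotin : o ∉ osuf' := fun h => absurd (hsuf_gt o h) (by omega)
    have honotdone : o ∉ (opens s).take k := fun h => absurd (hdone_lt o h) (by omega)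
    have hdonesub : ∀ a ∈ (opens s).take k, a ∈ opens s := fun a ha => List.take_subset _ _ ha
    have hsufsub : ∀ a ∈ osuf', a ∈ opens s := by
      intro a ha
      rw [hsplit]
      exact List.mem_append.mpr (Or.inr (List.mem_cons.mpr (Or.inr ha)))
    have hsmall_done : ∀ o'' ∈ opens s, o'' < o → o'' ∈ (opens s).take k := by
      intro o'' ho'' hlt
      rw [hsplit, List.mem_append] at ho''
      rcases ho'' with h | h
      · exact h
      · rcases List.mem_cons.mp h with rfl | h2
        · omega
        · exact absurd (hsuf_gt _ h2) (by omega)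
    have htake1 : (opens s).take (k+1) = (opens s).take k ++ [o] := by
      conv_lhs => rw [hsplit]
      rw [List.take_append]
      congr 1
      · exact List.take_of_length_le (by omega)
      · rw [hlen]
        simp
    have hsplit' : opens s = (opens s).take (k+1) ++ osuf' := by
      rw [htake1, List.append_assoc]
      exact hsplit
    have hlen' : ((opens s).take (k+1)).length = k + 1 := by
      rw [htake1]
      simp [hlen]
    have hgetD : m.getD ((o:Int)) 0 = (c:Int) := by
      rw [dict_getD_eq, hget o ho]
      rfl
    have hcast2 : ((c:Int) + 1) = ((c+1 : Nat) : Int) := by push_cast; ring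
    have hrotE : bRot s ((o:Int)) ((c:Int)) = aRot s ((o:Int), (c:Int)) := rfl
    have huniq : ∀ o' ∈ opens s, o' < c → clOf s o' = c → o' = o := by
      intro o' ho' _ hco'
      exact hinj o' ho' o ho (by rw [hco', hcdef])
    have hchainc : chainF s c = chainF s (o - 1) ++ [aRot s ((o:Int), (c:Int))] :=
      chainF_eq s c o ho hoc hcdef.symm huniq
    -- the accumulated value is the full chain word of c
    have hacc : (pend.getD ((c:Int)) []) ++ [aRot s ((o:Int), (c:Int))] = chainF s c := by
      cases hpc : pend.get? ((c:Int)) with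
      | some v0 =>
        obtain ⟨o2, ho2, hxe, hcondp, hv⟩ := (hIP _ v0).mp hpc
        have hco2 : clOf s o2 = c := by exact_mod_cast hxe.symm
        have ho2mem : o2 ∈ opens s := by
          rcases List.mem_cons.mp ho2 with rfl | h
          · exact ho
          · exact hsufsub _ h
        have ho2o : o2 = o := hinj o2 ho2mem o ho (by rw [hco2, hcdef])
        subst ho2o
        rw [dict_getD_eq, hpc]
        simp only [Option.getD_some]
        rw [hv, hchainc]
      | none =>
        have hnoprev : ¬ ∃ o' ∈ (opens s).take k, clOf s o' + 1 = o := by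
          rintro ⟨o', h1, h2⟩
          have : pend.get? ((c:Int)) = some (chainF s (o - 1)) :=
            (hIP _ _).mpr ⟨o, List.mem_cons_self, rfl, ⟨o', h1, h2⟩, rfl⟩
          rw [hpc] at this
          cases this
        have hprevnil : chainF s (o - 1) = [] := by
          apply chainF_nil
          rintro o'' ho'' ⟨hlt, hclo⟩
          have ho1 : 1 ≤ o := by omega
          have ho''lt : o'' < o := by omega
          exact hnoprev ⟨o'', hsmall_done o'' ho'' ho''lt, by omega⟩
        rw [dict_getD_eq, hpc]
        rw [hchainc, hprevnil]
        rfl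
    rw [List.map_cons, List.foldl_cons]
    cases hnxt : m.get? ((c:Int) + 1) with
    | some w =>
      have hc1opens : (c+1) ∈ opens s := by
        obtain ⟨o2, ho2, he⟩ := hkeys ((c:Int) + 1) (by rw [hnxt]; rfl)
        have : o2 = c + 1 := by omega
        exact this ▸ ho2
      have hw : ((clOf s (c+1) : Nat) : Int) = w := by
        have := hget (c+1) hc1opens
        rw [← hcast2, hnxt] at this
        exact Option.some_inj.mp this.symm
      have hc1suf' : (c+1) ∈ osuf' := by
        have hmem : (c+1) ∈ opens s := hc1opens
        rw [hsplit, List.mem_append] at hmem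
        rcases hmem with h | h
        · exact absurd (hdone_lt _ h) (by omega)
        · rcases List.mem_cons.mp h with he | h2
          · omega
          · exact h2
      have hstepB : bStep2 s m (pend, fin) ((o:Int)) =
          ((pend.erase ((c:Int))).insert (((clOf s (c+1) : Nat)):Int)
            ((pend.getD ((c:Int)) []) ++ [aRot s ((o:Int), (c:Int))]), fin) := by
        simp only [bStep2, hgetD, hnxt, hrotE, ← hw]
      rw [hstepB]
      apply finChar_go s m hget hkeys hinj hcl osuf' (k+1) _ fin hsplit' hlen'
      · -- IP'
        intro x v
        rw [dict_get?_insert]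
        by_cases hx2 : x = (((clOf s (c+1) : Nat)):Int)
        · rw [if_pos hx2]
          rw [hacc]
          constructor
          · intro hsv
            have hv : v = chainF s c := (Option.some_inj.mp hsv).symm
            refine ⟨c+1, hc1suf', by rw [hx2], ⟨o, ?_, by omega⟩, by simpa using hv⟩
            rw [htake1]
            exact List.mem_append.mpr (Or.inr (by simp))
          · rintro ⟨o2, ho2, hxe, hcondp, hv⟩
            have : clOf s o2 = clOf s (c+1) := by
              rw [hx2] at hxe
              exact_mod_cast hxe.symm
            have ho2e : o2 = c + 1 := hinj o2 (hsufsub _ ho2) (c+1) hc1opens this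
            subst ho2e
            rw [hv]
            simp
        · rw [if_neg hx2, dict_get?_erase]
          by_cases hxc : x = ((c:Int))
          · rw [if_pos hxc]
            constructor
            · intro h
              cases h
            · rintro ⟨o2, ho2, hxe, _, _⟩
              have : clOf s o2 = c := by
                rw [hxc] at hxe
                exact_mod_cast hxe.symm
              have : o2 = o := hinj o2 (hsufsub _ ho2) o ho (by rw [this, hcdef])
              exact absurd (this ▸ ho2) honotin
          · rw [if_neg hxc, hIP x v]
            constructor
            · rintro ⟨o2, ho2, hxe, ⟨o', h1, h2⟩, hv⟩
              have ho2ne : o2 ≠ o := by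
                intro he
                subst he
                exact hxc (by rw [hxe, hcdef])
              rcases List.mem_cons.mp ho2 with he | h
              · exact absurd he ho2ne
              · exact ⟨o2, h, hxe, ⟨o', by rw [htake1]; exact List.mem_append.mpr (Or.inl h1), h2⟩, hv⟩
            · rintro ⟨o2, ho2, hxe, ⟨o', h1, h2⟩, hv⟩
              refine ⟨o2, List.mem_cons.mpr (Or.inr ho2), hxe, ⟨o', ?_, h2⟩, hv⟩
              rw [htake1, List.mem_append] at h1
              rcases h1 with h | h
              · exact h
              · exfalso
                have : o' = o := by simpa using h
                subst this
                have : o2 = c + 1 := by omega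
                subst this
                exact hx2 (by rw [hxe])
      · -- IF'
        intro x v
        rw [hIF x v]
        constructor
        · rintro ⟨o'', h1, h2, h3, h4⟩
          exact ⟨o'', by rw [htake1]; exact List.mem_append.mpr (Or.inl h1), h2, h3, h4⟩
        · rintro ⟨o'', h1, h2, h3, h4⟩
          rw [htake1, List.mem_append] at h1
          rcases h1 with h | h
          · exact ⟨o'', h, h2, h3, h4⟩
          · exfalso
            have : o'' = o := by simpa using h
            subst this
            exact h3 (by rw [← hcdef]; exact hc1opens)
    | none =>
      have hnotin : (c+1) ∉ opens s := by
        intro hmem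
        have := hget (c+1) hmem
        rw [← hcast2, hnxt] at this
        cases this
      have hstepB : bStep2 s m (pend, fin) ((o:Int)) =
          (pend.erase ((c:Int)),
           fin.insert ((c:Int)) ((pend.getD ((c:Int)) []) ++ [aRot s ((o:Int), (c:Int))])) := by
        simp only [bStep2, hgetD, hnxt, hrotE]
      rw [hstepB]
      apply finChar_go s m hget hkeys hinj hcl osuf' (k+1) _ _ hsplit' hlen'
      · -- IP'
        intro x v
        rw [dict_get?_erase]
        by_cases hxc : x = ((c:Int))
        · rw [if_pos hxc]
          constructor
          · intro h
            cases h
          · rintro ⟨o2, ho2, hxe, _, _⟩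
            have : clOf s o2 = c := by
              rw [hxc] at hxe
              exact_mod_cast hxe.symm
            have : o2 = o := hinj o2 (hsufsub _ ho2) o ho (by rw [this, hcdef])
            exact absurd (this ▸ ho2) honotin
        · rw [if_neg hxc, hIP x v]
          constructor
          · rintro ⟨o2, ho2, hxe, ⟨o', h1, h2⟩, hv⟩
            have ho2ne : o2 ≠ o := by
              intro he
              subst he
              exact hxc (by rw [hxe, hcdef])
            rcases List.mem_cons.mp ho2 with he | h
            · exact absurd he ho2ne
            · exact ⟨o2, h, hxe, ⟨o', by rw [htake1]; exact List.mem_append.mpr (Or.inl h1), h2⟩, hv⟩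
          · rintro ⟨o2, ho2, hxe, ⟨o', h1, h2⟩, hv⟩
            refine ⟨o2, List.mem_cons.mpr (Or.inr ho2), hxe, ⟨o', ?_, h2⟩, hv⟩
            rw [htake1, List.mem_append] at h1
            rcases h1 with h | h
            · exact h
            · exfalso
              have : o' = o := by simpa using h
              subst this
              have ho2e : o2 = c + 1 := by omega
              subst ho2e
              exact hnotin (hsufsub _ ho2)
      · -- IF'
        intro x v
        rw [dict_get?_insert]
        by_cases hxc : x = ((c:Int))
        · rw [if_pos hxc]
          rw [hacc]
          constructor
          · intro hsv
            have hv : v = chainF s c := (Option.some_inj.mp hsv).symm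
            refine ⟨o, ?_, by rw [hxc, hcdef], by rw [← hcdef]; exact hnotin, by rw [hv, hcdef]⟩
            rw [htake1]
            exact List.mem_append.mpr (Or.inr (by simp))
          · rintro ⟨o'', h1, hxe, h3, h4⟩
            have : clOf s o'' = c := by
              rw [hxc] at hxe
              exact_mod_cast hxe.symm
            rw [h4, this]
        · rw [if_neg hxc, hIF x v]
          constructor
          · rintro ⟨o'', h1, h2, h3, h4⟩
            exact ⟨o'', by rw [htake1]; exact List.mem_append.mpr (Or.inl h1), h2, h3, h4⟩
          · rintro ⟨o'', h1, h2, h3, h4⟩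
            rw [htake1, List.mem_append] at h1
            rcases h1 with h | h
            · exact ⟨o'', h, h2, h3, h4⟩
            · exfalso
              have : o'' = o := by simpa using h
              subst this
              exact hxc (by rw [h2, hcdef])

theorem finChar (s : List Char) (hpre : s.foldl preCnt 0 = 0) :
    ∀ x v, (bGroups s (bMatch s)).2.get? x = some v ↔
      ∃ o ∈ opens s, x = (clOf s o : Int) ∧ (clOf s o + 1) ∉ opens s ∧ v = chainF s (clOf s o) := by
  have hget : ∀ o ∈ opens s, (bMatch s).get? (o:Int) = some ((clOf s o : Int)) :=
    fun o ho => (bMatch_get s hpre o ho).2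
  have hcl : ∀ o ∈ opens s, o < clOf s o ∧ clOf s o < s.length := by
    intro o ho
    have h1 := (bMatch_get s hpre o ho).1
    have h2 := mAt_spec s o (clOf s o) h1
    exact ⟨h2.1, h2.2.1⟩
  have hgo := finChar_go s (bMatch s) hget (bMatch_keys_inv s hpre) (bMatch_inj s hpre) hcl
      (opens s) 0 ⟨[]⟩ ⟨[]⟩ (by simp) (by simp)
      (by
        intro x v
        rw [dict_empty_get?]
        constructor
        · intro h
          cases h
        · rintro ⟨o2, ho2, -, ⟨o', h1, -⟩, -⟩
          simp at h1)
      (by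
        intro x v
        rw [dict_empty_get?]
        constructor
        · intro h
          cases h
        · rintro ⟨o'', h1, -⟩
          simp at h1)
  have hB : bGroups s (bMatch s) =
      (((opens s).map (fun (u : Nat) => (u : Int))).foldl (bStep2 s (bMatch s)) (⟨[]⟩, ⟨[]⟩)) := by
    unfold bGroups
    rw [bMatch_sorted s hpre]
  intro x v
  rw [hB]
  exact hgo x v

-- ---------- the scan of B, characterized ----------

theorem nGo_inv (s : List Char)
    (hm : ∀ o ∈ opens s, mAt s o = some (clOf s o))
    (hinj : ∀ o1 ∈ opens s, ∀ o2 ∈ opens s, clOf s o1 = clOf s o2 → o1 = o2) :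
    ∀ (l : List Char) (k : Nat) (js : List Nat) (chains : PySem.Dict Int (List (List Char))),
      l = s.drop k →
      js.Pairwise (· < ·) →
      (∀ idx (h : idx < js.length), js[idx] < k ∧ s[js[idx]]? = some '[' ∧
          mAt s js[idx] = mclose (s.drop k) k (js.length - 1 - idx)) →
      (∀ o : Nat, o < k → s[o]? = some '[' → o ∈ js ∨ clOf s o < k) →
      (∀ x v, chains.get? x = some v ↔ ∃ c : Nat, x = (c:Int) ∧ c < k ∧
          (∃ o ∈ opens s, clOf s o = c) ∧ ¬ ((c+1) ∈ opens s ∧ clOf s (c+1) < k) ∧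
          v = chainF s c) →
      chains.keys.Nodup →
      (∀ x v, (nGo s l ((k:Nat):Int) (js.map (fun (u : Nat) => (u : Int))) chains).get? x = some v ↔
          ∃ c : Nat, x = (c:Int) ∧ (∃ o ∈ opens s, clOf s o = c) ∧ ((c+1) ∉ opens s) ∧
          v = chainF s c) ∧
      (nGo s l ((k:Nat):Int) (js.map (fun (u : Nat) => (u : Int))) chains).keys.Nodup
  | [], k, js, chains, hl, hpw, hstack, hcompl, hchains, hnd => by
    have hkn : s.length ≤ k := by
      have := congrArg List.length hl
      simp at this
      omega
    have hclb : ∀ o ∈ opens s, o < clOf s o ∧ clOf s o < s.length := by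
      intro o ho
      have h2 := mAt_spec s o (clOf s o) (hm o ho)
      exact ⟨h2.1, h2.2.1⟩
    refine ⟨?_, hnd⟩
    intro x v
    show chains.get? x = some v ↔ _
    rw [hchains x v]
    constructor
    · rintro ⟨c, h1, h2, hex, h4, h5⟩
      refine ⟨c, h1, hex, ?_, h5⟩
      intro hc1
      obtain ⟨o, ho, hco⟩ := hex
      exact h4 ⟨hc1, by have := (hclb (c+1) hc1).2; omega⟩
    · rintro ⟨c, h1, hex, hnotin, h5⟩
      obtain ⟨o, ho, hco⟩ := hex
      refine ⟨c, h1, by have := (hclb o ho).2; omega, ⟨o, ho, hco⟩, ?_, h5⟩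
      rintro ⟨hin, -⟩
      exact hnotin hin
  | ch :: t, k, js, chains, hl, hpw, hstack, hcompl, hchains, hnd => by
    have hk : k < s.length := by
      have := congrArg List.length hl
      simp at this
      omega
    have hsk : s[k]? = some ch := by
      have h0 : (s.drop k)[0]? = s[k + 0]? := List.getElem?_drop
      rw [← hl] at h0
      simpa using h0.symm
    have ht : t = s.drop (k+1) := by
      rw [List.drop_eq_getElem_cons hk] at hl
      exact (List.cons.injEq _ _ _ _).mp hl |>.2
    have hjslt : ∀ u ∈ js, u < k := by
      intro u hu
      obtain ⟨idx, hidx, rfl⟩ := List.mem_iff_getElem.mp hu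
      exact (hstack idx hidx).1
    have hclb : ∀ o ∈ opens s, o < clOf s o ∧ clOf s o < s.length := by
      intro o ho
      have h2 := mAt_spec s o (clOf s o) (hm o ho)
      exact ⟨h2.1, h2.2.1⟩
    have hclocc : ∀ o ∈ opens s, s[clOf s o]? = some ']' := by
      intro o ho
      exact (mAt_spec s o (clOf s o) (hm o ho)).2.2.1
    have hcast : (((k:Nat)):Int) + 1 = (((k+1:Nat)):Int) := by push_cast; ring
    by_cases hch : ch = '['
    · -- push
      subst hch
      have hnotk : ¬ ∃ o ∈ opens s, clOf s o = k := by
        rintro ⟨o, ho, hco⟩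
        have := hclocc o ho
        rw [hco, hsk] at this
        exact absurd (Option.some_inj.mp this) (by decide)
      have hstep : nGo s ('[' :: t) (((k:Nat)):Int) (js.map (fun (u:Nat) => (u:Int))) chains
          = nGo s t ((((k+1:Nat)):Int)) ((js ++ [k]).map (fun (u:Nat) => (u:Int))) chains := by
        simp only [nGo]
        rw [if_pos trivial, hcast]
        congr 1
        simp
      rw [hstep]
      apply nGo_inv s hm hinj t (k+1) (js ++ [k]) chains ht
      · rw [List.pairwise_append]
        exact ⟨hpw, List.pairwise_singleton _ _, by
          intro a ha b hb
          rw [List.mem_singleton] at hb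
          subst hb
          exact hjslt a ha⟩
      · intro idx hidx
        rw [List.length_append, List.length_singleton] at hidx
        by_cases hlt : idx < js.length
        · have he : (js ++ [k])[idx] = js[idx] := List.getElem_append_left hlt
          obtain ⟨h1, h2, h3⟩ := hstack idx hlt
          rw [he]
          refine ⟨by omega, h2, ?_⟩
          rw [h3]
          have hnc : s[k]? ≠ some ']' := by rw [hsk]; simp
          rw [mclose_step_other s k _ hk hnc, if_pos hsk]
          congr 1
          rw [List.length_append, List.length_singleton]
          omega
        · have hidx' : idx = js.length := by omega
          subst hidx'
          have he : (js ++ [k])[js.length] = k := by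
            rw [List.getElem_append_right (by omega)]
            simp
          rw [he]
          refine ⟨by omega, hsk, ?_⟩
          show mAt s k = mclose (s.drop (k+1)) (k+1) ((js ++ [k]).length - 1 - js.length)
          rw [List.length_append, List.length_singleton]
          have h0 : js.length + 1 - 1 - js.length = 0 := by omega
          rw [h0]
          rfl
      · intro o ho1 ho2
        by_cases ho : o = k
        · subst ho
          exact Or.inl (by simp)
        · rcases hcompl o (by omega) ho2 with h | h
          · exact Or.inl (by rw [List.mem_append]; exact Or.inl h)
          · exact Or.inr (by omega)
      · intro x v
        rw [hchains x v]
        constructor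
        · rintro ⟨c, h1, h2, hex, hnc, h5⟩
          refine ⟨c, h1, by omega, hex, ?_, h5⟩
          rintro ⟨hin, hlt⟩
          by_cases hcl2 : clOf s (c+1) < k
          · exact hnc ⟨hin, hcl2⟩
          · have : clOf s (c+1) = k := by omega
            exact hnotk ⟨c+1, hin, this⟩
        · rintro ⟨c, h1, h2, hex, hnc, h5⟩
          have hck : c < k := by
            rcases Nat.lt_or_ge c k with h | h
            · exact h
            · exfalso
              have : c = k := by omega
              subst this
              exact hnotk hex
          refine ⟨c, h1, hck, hex, ?_, h5⟩
          rintro ⟨hin, hlt⟩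
          exact hnc ⟨hin, by omega⟩
      · exact hnd
    · by_cases hch2 : ch = ']'
      · subst hch2
        rcases List.eq_nil_or_concat js with rfl | ⟨js₀, jm, hjs⟩
        · -- unmatched ']' with empty stack: skip
          have hnotk : ¬ ∃ o ∈ opens s, clOf s o = k := by
            rintro ⟨o, ho, hco⟩
            have holt : o < k := by
              have := (hclb o ho).1
              omega
            obtain ⟨ho1, ho2⟩ := (mem_opens s o).mp ho
            rcases hcompl o holt ho2 with h | h
            · simp at h
            · omega
          have hstep : nGo s (']' :: t) (((k:Nat)):Int) (([]:List Nat).map (fun (u:Nat) => (u:Int))) chains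
              = nGo s t ((((k+1:Nat)):Int)) (([]:List Nat).map (fun (u:Nat) => (u:Int))) chains := by
            simp only [List.map_nil, nGo]
            try rw [if_neg hch]
            first
            | rw [if_neg (show ¬(True ∧ ([]:List Int) ≠ []) from fun hcon => hcon.2 rfl)]
            | rw [if_neg (show ¬((']':Char) = ']' ∧ ([]:List Int) ≠ []) from fun hcon => hcon.2 rfl)]
            try rw [hcast]
            try rfl
          rw [hstep]
          apply nGo_inv s hm hinj t (k+1) [] chains ht (by simp) (by intro idx h; simp at h)
          · intro o ho1 ho2
            have honek : o ≠ k := by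
              intro he
              subst he
              rw [hsk] at ho2
              exact absurd (Option.some_inj.mp ho2) (by decide)
            rcases hcompl o (by omega) ho2 with h | h
            · simp at h
            · exact Or.inr (by omega)
          · intro x v
            rw [hchains x v]
            constructor
            · rintro ⟨c, h1, h2, hex, hnc, h5⟩
              refine ⟨c, h1, by omega, hex, ?_, h5⟩
              rintro ⟨hin, hlt⟩
              by_cases hcl2 : clOf s (c+1) < k
              · exact hnc ⟨hin, hcl2⟩
              · have : clOf s (c+1) = k := by omega
                exact hnotk ⟨c+1, hin, this⟩
            · rintro ⟨c, h1, h2, hex, hnc, h5⟩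
              have hck : c < k := by
                rcases Nat.lt_or_ge c k with h | h
                · exact h
                · exfalso
                  have : c = k := by omega
                  subst this
                  exact hnotk hex
              refine ⟨c, h1, hck, hex, ?_, h5⟩
              rintro ⟨hin, hlt⟩
              exact hnc ⟨hin, by omega⟩
          · exact hnd
        · -- pop
          rw [List.concat_eq_append] at hjs
          subst hjs
          have hmap : (js₀ ++ [jm]).map (fun (u : Nat) => (u : Int)) =
              js₀.map (fun (u : Nat) => (u : Int)) ++ [(jm:Int)] := by simp
          have hlen0 : js₀.length < (js₀ ++ [jm]).length := by simp
          have hjm := hstack js₀.length hlen0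
          have hjmget : (js₀ ++ [jm])[js₀.length] = jm := by
            rw [List.getElem_append_right (by omega)]
            simp
          rw [hjmget] at hjm
          obtain ⟨hjmk, hjmocc, hjmcl⟩ := hjm
          have hdep0 : (js₀ ++ [jm]).length - 1 - js₀.length = 0 := by simp
          rw [hdep0] at hjmcl
          have hjmsome : mAt s jm = some k := by
            rw [hjmcl, mclose_step_close s k 0 hk hsk, if_pos rfl]
          have hcljm : clOf s jm = k := by
            unfold clOf
            rw [hjmsome]
            rfl
          have hjmopens : jm ∈ opens s := (mem_opens s jm).mpr ⟨occ_lt s hjmocc, hjmocc⟩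
          have hpw0 : js₀.Pairwise (· < ·) := (List.pairwise_append.mp hpw).1
          set e : Int := (jm:Int) - 1 with hedef
          set rot : List Char := aRot s ((jm:Int), ((k:Nat):Int)) with hrotdef
          set acc : List (List Char) := chains.getD e [] ++ [rot] with haccdef
          have hstep : nGo s (']' :: t) (((k:Nat)):Int) ((js₀ ++ [jm]).map (fun (u:Nat) => (u:Int))) chains
              = nGo s t ((((k+1:Nat)):Int)) (js₀.map (fun (u:Nat) => (u:Int)))
                  ((chains.erase e).insert (((k:Nat)):Int) acc) := by
            simp only [nGo]
            rw [hmap]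
            try rw [if_neg hch]
            first
            | rw [if_pos (show (True ∧ js₀.map (fun (u:Nat) => (u:Int)) ++ [(jm:Int)] ≠ []) from ⟨trivial, by simp⟩)]
            | rw [if_pos (show ((']':Char) = ']' ∧ js₀.map (fun (u:Nat) => (u:Int)) ++ [(jm:Int)] ≠ []) from ⟨rfl, by simp⟩)]
            rw [pop?_concat]
            try rw [hcast]
            try rfl
          rw [hstep]
          have huniq_k : ∀ o' ∈ opens s, o' < k → clOf s o' = k → o' = jm :=
            fun o' ho' _ h => hinj o' ho' jm hjmopens (h.trans hcljm.symm)
          have hchainFk : chainF s k = chainF s (jm - 1) ++ [rot] :=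
            chainF_eq s k jm hjmopens hjmk hcljm huniq_k
          -- acc is the full chain word of k
          have hacc : acc = chainF s k := by
            by_cases hjm0 : jm = 0
            · subst hjm0
              have hgetE : chains.get? e = none := by
                cases hg : chains.get? e with
                | none => rfl
                | some v =>
                  obtain ⟨c, hxc, -, -, -, -⟩ := (hchains e v).mp hg
                  rw [hedef] at hxc
                  omega
              have hnil : chainF s (0 - 1) = [] := by
                apply chainF_nil
                rintro o'' ho'' ⟨hlt, -⟩
                omega
              rw [haccdef, dict_getD_eq, hgetE, hchainFk, hnil]
              rfl
            · have hjm1 : 1 ≤ jm := by omega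
              have he2 : e = (((jm - 1 : Nat)):Int) := by
                rw [hedef, Nat.cast_sub hjm1, Nat.cast_one]
              cases hg : chains.get? e with
              | some v =>
                obtain ⟨c', hxc, hck, hex', hnc', hv⟩ := (hchains e v).mp hg
                have hce : c' = jm - 1 := by
                  rw [he2] at hxc
                  exact_mod_cast hxc.symm
                subst hce
                rw [haccdef, dict_getD_eq, hg, hchainFk, hv]
                rfl
              | none =>
                have hnil : chainF s (jm - 1) = [] := by
                  apply chainF_nil
                  rintro o'' ho'' ⟨hlt, hco''⟩
                  have hcontra : chains.get? e = some (chainF s (jm - 1)) := by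
                    rw [he2]
                    apply (hchains _ _).mpr
                    refine ⟨jm - 1, rfl, by omega, ⟨o'', ho'', hco''⟩, ?_, rfl⟩
                    rintro ⟨hin, hlt2⟩
                    have hjj : jm - 1 + 1 = jm := by omega
                    rw [hjj] at hlt2
                    omega
                  rw [hg] at hcontra
                  cases hcontra
                rw [haccdef, dict_getD_eq, hg, hchainFk, hnil]
                rfl
          apply nGo_inv s hm hinj t (k+1) js₀ _ ht hpw0
          · intro idx hidx
            have hidx' : idx < (js₀ ++ [jm]).length := by simp; omega
            have he : (js₀ ++ [jm])[idx] = js₀[idx] := List.getElem_append_left hidx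
            obtain ⟨h1, h2, h3⟩ := hstack idx hidx'
            rw [he] at h1 h2 h3
            refine ⟨by omega, h2, ?_⟩
            rw [h3]
            have hd : (js₀ ++ [jm]).length - 1 - idx = (js₀.length - 1 - idx) + 1 := by
              simp
              all_goals omega
            rw [hd, mclose_step_close s k _ hk hsk, if_neg (by omega)]
            all_goals (congr 1 <;> omega)
          · intro o ho1 ho2
            have honek : o ≠ k := by
              intro he'
              subst he'
              rw [hsk] at ho2
              exact absurd (Option.some_inj.mp ho2) (by decide)
            rcases hcompl o (by omega) ho2 with h | h
            · rw [List.mem_append, List.mem_singleton] at h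
              rcases h with h | h
              · exact Or.inl h
              · subst h
                exact Or.inr (by rw [hcljm]; omega)
            · exact Or.inr (by omega)
          · intro x v
            rw [dict_get?_insert]
            by_cases hxk : x = (((k:Nat)):Int)
            · rw [if_pos hxk]
              constructor
              · intro hsv
                have hv : v = chainF s k := by
                  rw [← hacc]
                  exact (Option.some_inj.mp hsv).symm
                refine ⟨k, hxk, by omega, ⟨jm, hjmopens, hcljm⟩, ?_, hv⟩
                rintro ⟨hin, hlt⟩
                have := (hclb (k+1) hin).1
                omega
              · rintro ⟨c, hxc, -, -, -, hv⟩
                have hck : c = k := by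
                  rw [hxk] at hxc
                  exact_mod_cast hxc.symm
                subst hck
                rw [hv, ← hacc]
            · rw [if_neg hxk, dict_get?_erase]
              by_cases hxe : x = e
              · rw [if_pos hxe]
                constructor
                · intro h
                  cases h
                · rintro ⟨c, hxc, hck1, hex, hnc, hv⟩
                  by_cases hjm0 : jm = 0
                  · subst hjm0
                    rw [hxe, hedef] at hxc
                    omega
                  · have hce : c = jm - 1 := by
                      have he2 : e = (((jm - 1 : Nat)):Int) := by
                        rw [hedef, Nat.cast_sub (by omega), Nat.cast_one]
                      rw [hxe, he2] at hxc
                      exact_mod_cast hxc.symm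
                    subst hce
                    exfalso
                    apply hnc
                    have hjj : jm - 1 + 1 = jm := by omega
                    rw [hjj]
                    exact ⟨hjmopens, by rw [hcljm]; omega⟩
              · rw [if_neg hxe, hchains x v]
                constructor
                · rintro ⟨c, hxc, hck, hex, hnc, hv⟩
                  refine ⟨c, hxc, by omega, hex, ?_, hv⟩
                  rintro ⟨hin, hlt⟩
                  by_cases hcl2 : clOf s (c+1) < k
                  · exact hnc ⟨hin, hcl2⟩
                  · have hck2 : clOf s (c+1) = k := by omega
                    have hcjm : c + 1 = jm := hinj (c+1) hin jm hjmopens (hck2.trans hcljm.symm)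
                    apply hxe
                    rw [hxc, hedef, ← hcjm]
                    push_cast
                    ring
                · rintro ⟨c, hxc, hck1, hex, hnc, hv⟩
                  have hck : c < k := by
                    rcases Nat.lt_or_ge c k with h | h
                    · exact h
                    · exfalso
                      have : c = k := by omega
                      subst this
                      exact hxk hxc
                  refine ⟨c, hxc, hck, hex, ?_, hv⟩
                  rintro ⟨hin, hlt⟩
                  exact hnc ⟨hin, by omega⟩
          · exact dict_keys_nodup_insert _ _ _ (dict_keys_nodup_erase _ _ hnd)
      · -- other character
        have hnotk : ¬ ∃ o ∈ opens s, clOf s o = k := by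
          rintro ⟨o, ho, hco⟩
          have := hclocc o ho
          rw [hco, hsk] at this
          exact hch2 (Option.some_inj.mp this)
        have hstep : nGo s (ch :: t) (((k:Nat)):Int) (js.map (fun (u:Nat) => (u:Int))) chains
            = nGo s t ((((k+1:Nat)):Int)) (js.map (fun (u:Nat) => (u:Int))) chains := by
          simp only [nGo]
          rw [if_neg hch, if_neg (by rintro ⟨h, -⟩; exact hch2 h), hcast]
        rw [hstep]
        apply nGo_inv s hm hinj t (k+1) js chains ht hpw
        · intro idx hidx
          obtain ⟨h1, h2, h3⟩ := hstack idx hidx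
          refine ⟨by omega, h2, ?_⟩
          rw [h3]
          have hnc : s[k]? ≠ some ']' := by rw [hsk]; simp [hch2]
          rw [mclose_step_other s k _ hk hnc, if_neg (by rw [hsk]; simp [hch])]
        · intro o ho1 ho2
          have honek : o ≠ k := by
            intro he
            subst he
            rw [hsk] at ho2
            exact hch (Option.some_inj.mp ho2)
          rcases hcompl o (by omega) ho2 with h | h
          · exact Or.inl h
          · exact Or.inr (by omega)
        · intro x v
          rw [hchains x v]
          constructor
          · rintro ⟨c, h1, h2, hex, hnc, h5⟩
            refine ⟨c, h1, by omega, hex, ?_, h5⟩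
            rintro ⟨hin, hlt⟩
            by_cases hcl2 : clOf s (c+1) < k
            · exact hnc ⟨hin, hcl2⟩
            · have : clOf s (c+1) = k := by omega
              exact hnotk ⟨c+1, hin, this⟩
          · rintro ⟨c, h1, h2, hex, hnc, h5⟩
            have hck : c < k := by
              rcases Nat.lt_or_ge c k with h | h
              · exact h
              · exfalso
                have : c = k := by omega
                subst this
                exact hnotk hex
            refine ⟨c, h1, hck, hex, ?_, h5⟩
            rintro ⟨hin, hlt⟩
            exact hnc ⟨hin, by omega⟩
        · exact hnd

theorem nScan_char (s : List Char) (hpre : s.foldl preCnt 0 = 0) :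
    (∀ x v, (nGo s s 0 [] PySem.Dict.empty).get? x = some v ↔
        ∃ c : Nat, x = (c:Int) ∧ (∃ o ∈ opens s, clOf s o = c) ∧ ((c+1) ∉ opens s) ∧
        v = chainF s c) ∧
    (nGo s s 0 [] PySem.Dict.empty).keys.Nodup := by
  have hm : ∀ o ∈ opens s, mAt s o = some (clOf s o) :=
    fun o ho => (bMatch_get s hpre o ho).1
  have h := nGo_inv s hm (bMatch_inj s hpre) s 0 [] PySem.Dict.empty
    (by simp) (by simp) (by intro idx h; simp at h) (by intro o h; omega)
    (by
      intro x v
      constructor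
      · intro h
        cases h
      · rintro ⟨c, -, hck, -, -, -⟩
        omega)
    (by simp [dict_keys_eq, PySem.Dict.empty, PySem.Dict.items])
  simpa using h

-- ---------- phase 3 for B: back-to-front insertion equals the piecewise splice ----------

def canonFrom (s : List Char) (g : Int → List Char) : Nat → List Nat → List Char
  | p, [] => s.drop p
  | p, c :: ks => (s.drop p).take (c + 1 - p) ++ g ((c:Nat):Int) ++ canonFrom s g (c+1) ks

theorem bSplice_canon (s : List Char) (g : Int → List Char) :
    ∀ (ksN : List Nat) (X : List (List Char)) (prev : Nat),
      ksN.Pairwise (· < ·) →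
      (∀ c ∈ ksN, prev ≤ c ∧ c < s.length) →
      ((ksN.map (fun (u:Nat) => (u:Int))).foldl (stepB s g) (X, ((prev:Nat):Int))).1.flatten
        ++ PySem.Chars.slice s
            (some (((ksN.map (fun (u:Nat) => (u:Int))).foldl (stepB s g) (X, ((prev:Nat):Int))).2)) none
      = X.flatten ++ canonFrom s g prev ksN
  | [], X, prev, _, _ => by
    simp only [List.map_nil, List.foldl_nil, canonFrom]
    rw [PySem.Chars.slice_eq_listSlice, PySem.List.slice_from_natCast]
  | c :: ks, X, prev, hpw, hmem => by
    obtain ⟨hp, hn⟩ := hmem c List.mem_cons_self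
    have hpw' := (List.pairwise_cons.mp hpw).2
    have hhead := (List.pairwise_cons.mp hpw).1
    have hseg : PySem.Chars.slice s (some ((prev:Nat):Int)) (some (((c:Nat):Int) + 1)) =
        (s.drop prev).take (c + 1 - prev) := by
      rw [PySem.Chars.slice_eq_listSlice]
      have hc1 : (((c:Nat):Int) + 1) = (((c+1:Nat)):Int) := by push_cast; ring
      rw [hc1, PySem.List.slice_toNat s (Int.natCast_nonneg prev) (Int.natCast_nonneg (c+1))]
      rw [Int.toNat_natCast, Int.toNat_natCast]
    have hstep : stepB s g (X, ((prev:Nat):Int)) (((c:Nat):Int)) =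
        (X ++ [(s.drop prev).take (c + 1 - prev), g (((c:Nat):Int))], (((c+1:Nat)):Int)) := by
      simp only [stepB]
      rw [hseg]
      have h2 : (((c:Nat):Int)) + 1 = (((c+1:Nat)):Int) := by push_cast; ring
      rw [h2]
    rw [List.map_cons, List.foldl_cons, hstep]
    rw [bSplice_canon s g ks (X ++ [(s.drop prev).take (c + 1 - prev), g (((c:Nat):Int))]) (c+1)
      hpw' (fun x hx => ⟨by have := hhead x hx; omega, (hmem x (List.mem_cons.mpr (Or.inr hx))).2⟩)]
    show (X ++ [(s.drop prev).take (c + 1 - prev), g (((c:Nat):Int))]).flatten ++ canonFrom s g (c+1) ks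
        = X.flatten ++ ((s.drop prev).take (c + 1 - prev) ++ g (((c:Nat):Int)) ++ canonFrom s g (c+1) ks)
    simp [List.flatten_append]

theorem nPut_canon (s : List Char) (g : Int → List Char) :
    ∀ (ksN : List Nat) (p : Nat),
      ksN.Pairwise (· < ·) →
      (∀ c ∈ ksN, p ≤ c ∧ c < s.length) →
      (ksN.foldr (fun c P => P.take (c+1) ++ g ((c:Nat):Int) :: P.drop (c+1))
          (s.map (fun ch => [ch]))).length = s.length + ksN.length ∧
      (ksN.foldr (fun c P => P.take (c+1) ++ g ((c:Nat):Int) :: P.drop (c+1))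
          (s.map (fun ch => [ch]))).take p = (s.map (fun ch => [ch])).take p ∧
      ((ksN.foldr (fun c P => P.take (c+1) ++ g ((c:Nat):Int) :: P.drop (c+1))
          (s.map (fun ch => [ch]))).drop p).flatten = canonFrom s g p ksN
  | [], p, _, _ => by
    refine ⟨by simp, rfl, ?_⟩
    show ((s.map (fun ch => [ch])).drop p).flatten = s.drop p
    rw [← List.map_drop]
    induction s.drop p with
    | nil => rfl
    | cons a t ih => simp [ih]
  | c :: ks, p, hpw, hmem => by
    obtain ⟨hp, hn⟩ := hmem c List.mem_cons_self
    have hpw' := (List.pairwise_cons.mp hpw).2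
    have hhead := (List.pairwise_cons.mp hpw).1
    obtain ⟨ihlen, ihtake, ihdrop⟩ := nPut_canon s g ks (c+1) hpw'
      (fun x hx => ⟨by have := hhead x hx; omega, (hmem x (List.mem_cons.mpr (Or.inr hx))).2⟩)
    simp only [List.foldr_cons]
    set P := ks.foldr (fun c P => P.take (c+1) ++ g ((c:Nat):Int) :: P.drop (c+1))
        (s.map (fun ch => [ch])) with hP
    have hlenP : c + 1 ≤ P.length := by
      rw [ihlen]
      omega
    have hTlen : (P.take (c+1)).length = c + 1 := by
      rw [List.length_take]
      omega
    have hm : min p (c+1) = p := by omega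
    refine ⟨?_, ?_, ?_⟩
    · simp only [List.length_append, List.length_cons, List.length_take, List.length_drop]
      omega
    · rw [List.take_append_of_le_length (by rw [hTlen]; omega)]
      calc (P.take (c+1)).take p = P.take p := by rw [List.take_take, hm]
        _ = (P.take (c+1)).take p := by rw [List.take_take, hm]
        _ = ((s.map (fun ch => [ch])).take (c+1)).take p := by rw [ihtake]
        _ = (s.map (fun ch => [ch])).take p := by rw [List.take_take, hm]
    · rw [List.drop_append_of_le_length (by rw [hTlen]; omega)]
      rw [List.flatten_append]
      have htk : (P.take (c+1)).drop p = (((s.take (c+1)).drop p).map (fun ch => [ch])) := by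
        rw [ihtake, ← List.map_take, ← List.map_drop]
      rw [htk]
      have hfl : ((((s.take (c+1)).drop p).map (fun ch => [ch]))).flatten = (s.take (c+1)).drop p := by
        induction (s.take (c+1)).drop p with
        | nil => rfl
        | cons a t ih => simp [ih]
      rw [hfl]
      show (s.take (c+1)).drop p ++ (g ((c:Nat):Int) :: P.drop (c+1)).flatten
          = (s.drop p).take (c + 1 - p) ++ g ((c:Nat):Int) ++ canonFrom s g (c+1) ks
      rw [List.flatten_cons, ihdrop]
      rw [List.drop_take]
      simp [List.append_assoc]

-- ---------- B equals the reference splice ----------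

theorem put_insert_eq (s : List Char) (g : Int → List Char) :
    ∀ (ksN : List Nat), ksN.Pairwise (· < ·) → (∀ c ∈ ksN, c < s.length) →
      ksN.foldr (fun c P => PySem.List.insert P (((c:Nat):Int) + 1) (g ((c:Nat):Int)))
          (s.map (fun ch => [ch]))
      = ksN.foldr (fun c P => P.take (c+1) ++ g ((c:Nat):Int) :: P.drop (c+1))
          (s.map (fun ch => [ch]))
  | [], _, _ => rfl
  | c :: ks, hpw, hmem => by
    have hpw' := (List.pairwise_cons.mp hpw).2
    have hhead := (List.pairwise_cons.mp hpw).1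
    have hmem' : ∀ x ∈ ks, x < s.length := fun x hx => hmem x (List.mem_cons.mpr (Or.inr hx))
    have hbnd : ∀ x ∈ ks, c + 1 ≤ x ∧ x < s.length :=
      fun x hx => ⟨by have := hhead x hx; omega, hmem' x hx⟩
    obtain ⟨ihlen, -, -⟩ := nPut_canon s g ks (c+1) hpw' hbnd
    simp only [List.foldr_cons]
    rw [put_insert_eq s g ks hpw' hmem']
    set P := ks.foldr (fun c P => P.take (c+1) ++ g ((c:Nat):Int) :: P.drop (c+1))
        (s.map (fun ch => [ch])) with hP
    have hc1 : (((c:Nat):Int) + 1) = (((c+1:Nat)):Int) := by push_cast; ring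
    rw [hc1, PySem.List.insert_natCast P (c+1) _
      (by rw [ihlen]; have := hmem c List.mem_cons_self; omega)]

theorem newB_eq (s : List Char) (hpre : s.foldl preCnt 0 = 0) :
    nSplice s (nGo s s 0 [] PySem.Dict.empty) = bSplice s (bGroups s (bMatch s)).2 := by
  obtain ⟨hchar, hndD⟩ := nScan_char s hpre
  obtain ⟨hR1, hnta, hnfi, hfinkeys⟩ := phase2 s hpre
  have hfinchar := finChar s hpre
  set D := nGo s s 0 [] PySem.Dict.empty with hD
  set fin := (bGroups s (bMatch s)).2 with hfin
  have hclb : ∀ o ∈ opens s, o < clOf s o ∧ clOf s o < s.length := by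
    intro o ho
    have h1 := (bMatch_get s hpre o ho).1
    have h2 := mAt_spec s o (clOf s o) h1
    exact ⟨h2.1, h2.2.1⟩
  have hEq : ∀ x, D.get? x = fin.get? x := by
    intro x
    cases hd : D.get? x with
    | some v =>
      obtain ⟨c, hxc, ⟨o, ho, hco⟩, hni, hv⟩ := (hchar x v).mp hd
      symm
      exact (hfinchar x v).mpr ⟨o, ho, by rw [hxc, hco], by rw [hco]; exact hni, by rw [hco]; exact hv⟩
    | none =>
      cases hf : fin.get? x with
      | none => rfl
      | some v =>
        obtain ⟨o, ho, hxe, hni, hv⟩ := (hfinchar x v).mp hf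
        have hcontra : D.get? x = some v :=
          (hchar x v).mpr ⟨clOf s o, hxe, ⟨o, ho, rfl⟩, hni, hv⟩
        rw [hd] at hcontra
        cases hcontra
  have hgetDeq : ∀ i, D.getD i ([] : List (List Char)) = fin.getD i [] := by
    intro i
    rw [dict_getD_eq, dict_getD_eq, hEq i]
  have hperm : D.keys.Perm fin.keys := by
    rw [List.perm_ext_iff_of_nodup hndD hnfi]
    intro a
    rw [dict_mem_keys, dict_mem_keys, hEq a]
  set ks := PySem.List.sorted fin.keys (fun x => x) false with hks
  have hsorteq : PySem.List.sorted D.keys (fun x => x) false = ks :=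
    PySem.List.sorted_eq_sorted_of_perm _ _ _ (fun a b h => h) hperm
  have hksnd : ks.Nodup := (PySem.List.sorted_perm fin.keys (fun x => x) false).symm.nodup hnfi
  have hkspw : ks.Pairwise (· < ·) := by
    have h1 := PySem.List.sorted_pairwise fin.keys (fun x => x)
    have h2 : ks.Pairwise (· ≠ ·) := hksnd
    exact (h1.and h2).imp (fun h => lt_of_le_of_ne h.1 h.2)
  have hksmem : ∀ x ∈ ks, ∃ cc : Nat, x = (cc:Int) ∧ cc < s.length := by
    intro x hx
    have hxk : x ∈ fin.keys := (PySem.List.sorted_perm fin.keys (fun x => x) false).subset hx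
    obtain ⟨o, ho, rfl⟩ := hfinkeys x ((dict_mem_keys fin x).mp hxk)
    exact ⟨clOf s o, rfl, (hclb o ho).2⟩
  set ksN := ks.map Int.toNat with hksN
  have hback : ksN.map (fun (u:Nat) => (u:Int)) = ks := by
    rw [hksN, List.map_map]
    conv_rhs => rw [← List.map_id ks]
    exact List.map_congr_left (fun x hx => by
      obtain ⟨cc, rfl, _⟩ := hksmem x hx
      simp)
  have hksNpw : ksN.Pairwise (· < ·) := by
    have h1 : (ksN.map (fun (u:Nat) => (u:Int))).Pairwise (· < ·) := by
      rw [hback]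
      exact hkspw
    rw [List.pairwise_map] at h1
    exact h1.imp (fun h => by exact_mod_cast h)
  have hksNmem : ∀ c ∈ ksN, c < s.length := by
    intro c hc
    obtain ⟨x, hx, rfl⟩ := List.mem_map.mp hc
    obtain ⟨cc, rfl, hcc⟩ := hksmem x hx
    simpa using hcc
  set g : Int → List Char := fun i =>
    PySem.Chars.join [] (PySem.List.sorted (PySem.Set.ofList (fin.getD i [])) (fun x => x) false)
      ++ ['i','n','t','e','r','s','e','c','t','i','o','n','!','(','2','5',')'] with hg
  -- right-hand side
  have hB3 : bStep3 s fin = stepB s g := by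
    funext st c
    rfl
  have hcanon := bSplice_canon s g ksN [] 0 hksNpw (fun c hc => ⟨Nat.zero_le c, hksNmem c hc⟩)
  rw [hback] at hcanon
  have hRHS : bSplice s fin = canonFrom s g 0 ksN := by
    show PySem.Chars.join [] ((ks.foldl (bStep3 s fin) ([], (0:Int))).1 ++
        [PySem.Chars.slice s (some ((ks.foldl (bStep3 s fin) ([], (0:Int))).2)) none]) = _
    rw [hB3, join_nil_eq_flatten, List.flatten_append]
    simp only [List.flatten_cons, List.flatten_nil, List.append_nil]
    have h0 : ((0:Int)) = (((0:Nat)):Int) := by simp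
    rw [h0, hcanon]
    simp
  -- left-hand side
  have hrev : PySem.List.sorted D.keys (fun x => x) true = ks.reverse := by
    apply PySem.List.sorted_rev_eq_of_perm_of_pairwise_gt
    · exact (ks.reverse_perm).trans
        (((PySem.List.sorted_perm fin.keys (fun x => x) false)).trans hperm.symm)
    · rw [List.pairwise_reverse]
      exact hkspw
  have hput : ∀ (l : List Int) (res : List (List Char)),
      nPut D l res = l.foldl (fun res c => PySem.List.insert res (c + 1)
        (PySem.Chars.join [] (PySem.List.sorted (PySem.Set.ofList (D.getD c [])) (fun x => x) false)
          ++ ['i','n','t','e','r','s','e','c','t','i','o','n','!','(','2','5',')'])) res := by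
    intro l
    induction l with
    | nil => intro res; rfl
    | cons c t ih =>
      intro res
      simp only [nPut, List.foldl_cons]
      exact ih _
  have hfuneq : (fun (res : List (List Char)) (c : Int) => PySem.List.insert res (c + 1)
        (PySem.Chars.join [] (PySem.List.sorted (PySem.Set.ofList (D.getD c [])) (fun x => x) false)
          ++ ['i','n','t','e','r','s','e','c','t','i','o','n','!','(','2','5',')']))
      = (fun res c => PySem.List.insert res (c + 1) (g c)) := by
    funext res c
    rw [hgetDeq c]
  show PySem.Chars.join []
      (nPut D (PySem.List.sorted D.keys (fun x => x) true) (s.map (fun ch => [ch]))) = bSplice s fin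
  rw [hput, hfuneq, hrev, List.foldl_reverse, ← hback, List.foldr_map]
  rw [put_insert_eq s g ksN hksNpw hksNmem]
  obtain ⟨-, -, hflat⟩ := nPut_canon s g ksN 0 hksNpw (fun c hc => ⟨Nat.zero_le c, hksNmem c hc⟩)
  rw [List.drop_zero] at hflat
  rw [join_nil_eq_flatten, hflat, hRHS]

theorem main_string (string : String) (hpre : Pre_add_intersections_py string) :
    add_intersections_py string = add_intersections_py_alt string := by
  have hpre' : string.toList.foldl preCnt 0 = 0 := hpre
  have hall : ∀ o, o < string.toList.length → string.toList[o]? = some '[' →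
      mAt string.toList o = some (clOf string.toList o) := by
    intro o h1 h2
    exact (bMatch_get _ hpre' o ((mem_opens _ o).mpr ⟨h1, h2⟩)).1
  have hbr := aBrackets_eq string.toList hall
  have hpf : (opens string.toList).map (fun (o : Nat) => ((o : Int), (clOf string.toList o : Int))) =
      (opens string.toList).map (pairF string.toList) := rfl
  show (match aBrackets string.toList with
        | none => string
        | some brackets =>
            String.ofList (aInsert string.toList (aToAdd string.toList brackets))) =
      String.ofList (nSplice string.toList (nGo string.toList string.toList 0 [] PySem.Dict.empty))
  rw [hbr, hpf]
  show String.ofList (aInsert string.toList (aToAdd string.toList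
      ((opens string.toList).map (pairF string.toList)))) = _
  rw [main_eq string.toList hpre', ← newB_eq string.toList hpre']

-- ===== VERDICT (by name: the statement is the Claim_ definition above) =====
theorem add_intersections_py_spec : Claim_equal_add_intersections_py := by
  intro string hdom hpre
  show add_intersections_py string = add_intersections_py_alt string
  exact main_string string hpre
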